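-- pv_equiv track=rewrite | github.com/seochanjin/Baekjoon | WEEK3/1432.py | propagate_windows
-- ===== SOURCE A (Python) =====
-- from collections import deque, defaultdict
-- from collections import defaultdict, deque
--
-- def propagate_windows(n, out_adj, assigned):
--     INF = 10**9
--     earliest = [1]*(n+1)
--     latest   = [n]*(n+1)
--     # 이미 확정된 M_u들은 윈도우를 [m,m]로 고정
--     for u, m in assigned.items():
--         earliest[u] = latest[u] = m
--
--     # 1) 위상 정렬로 topo 순서 계산
--     indeg = [0]*(n+1)
--     for u in range(1,n+1):
--         for v in out_adj[u]:
--             indeg[v] += 1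
--     dq = deque(u for u in range(1,n+1) if indeg[u]==0)
--     topo = []
--     while dq:
--         u = dq.popleft()
--         topo.append(u)
--         for v in out_adj[u]:
--             indeg[v] -= 1
--             if indeg[v]==0:
--                 dq.append(v)
--     if len(topo)<n:
--         return None
--
--     # 2) earliest 전파: u→v 이면 earliest[v] ≥ earliest[u]+1
--     for u in topo:
--         for v in out_adj[u]:
--             earliest[v] = max(earliest[v], earliest[u]+1)
--     # 3) latest 전파: u→v 이면 latest[u] ≤ latest[v]-1
--     for u in reversed(topo):
--         for v in out_adj[u]:
--             latest[u] = min(latest[u], latest[v]-1)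
--
--     # 불가능 윈도우 검출
--     for u in range(1,n+1):
--         if earliest[u] > latest[u]:
--             return None
--     return earliest, latest
-- ===== SOURCE B (Python) =====
-- def propagate_windows(n, out_adj, assigned):
--     earliest = [1] * (n + 1)
--     latest = [n] * (n + 1)
--     for u, m in assigned.items():
--         earliest[u] = latest[u] = m
--
--     # Bellman-Ford-style chaotic fixpoint iteration: no topological sort at all.
--     # Repeatedly relax every edge in place; a DAG's windows stabilise within n
--     # rounds, while a cycle makes some value grow forever, so a round that still
--     # changes something after n confirming chances signals a cycle -> None.
--     changed = False
--     for _ in range(n + 1):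
--         changed = False
--         for u in range(1, n + 1):
--             for v in out_adj[u]:
--                 if earliest[u] + 1 > earliest[v]:
--                     earliest[v] = earliest[u] + 1
--                     changed = True
--         if not changed:
--             break
--     if changed:
--         return None
--
--     changed = False
--     for _ in range(n + 1):
--         changed = False
--         for u in range(n, 0, -1):
--             for v in out_adj[u]:
--                 if latest[v] - 1 < latest[u]:
--                     latest[u] = latest[v] - 1
--                     changed = True
--         if not changed:
--             break
--
--     for u in range(1, n + 1):
--         if earliest[u] > latest[u]:
--             return None
--     return earliest, latest
-- ===== Notes on version B (the rewrite author's own statement) =====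
-- stated objective: alternative
-- what changed: B drops the topological sort entirely: instead of Kahn's indegree queue plus two topo-ordered propagation passes, it computes both windows by in-place Bellman-Ford-style fixpoint iteration (repeated full-edge relaxation rounds with a change flag), detecting a cycle as failure to stabilise within n+1 rounds instead of len(topo)<n.
-- outside the precondition, e.g. on propagate_windows(2, {1: [0], 2: [], 0: [2]}, {}): A returns None, B returns ([2, 1, 1], [2, 1, 2])
import Mathlib
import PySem

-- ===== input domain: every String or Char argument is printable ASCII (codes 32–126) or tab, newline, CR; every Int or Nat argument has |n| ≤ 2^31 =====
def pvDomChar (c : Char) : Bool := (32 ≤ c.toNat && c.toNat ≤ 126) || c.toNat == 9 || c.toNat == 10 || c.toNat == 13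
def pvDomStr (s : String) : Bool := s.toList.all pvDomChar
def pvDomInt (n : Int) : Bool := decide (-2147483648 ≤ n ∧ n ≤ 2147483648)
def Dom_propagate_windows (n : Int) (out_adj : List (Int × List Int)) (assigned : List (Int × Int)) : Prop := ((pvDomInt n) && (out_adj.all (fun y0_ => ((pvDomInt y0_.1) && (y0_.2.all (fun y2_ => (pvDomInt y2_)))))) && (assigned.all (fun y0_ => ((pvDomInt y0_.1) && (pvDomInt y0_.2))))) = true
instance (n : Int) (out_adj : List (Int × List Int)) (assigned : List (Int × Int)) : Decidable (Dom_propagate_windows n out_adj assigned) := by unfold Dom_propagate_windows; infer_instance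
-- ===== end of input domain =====

-- B replaces A's Kahn topological sort + two topo-ordered propagation passes by plain
-- Bellman-Ford-style fixpoint iteration (repeated in-place edge-relaxation rounds), with a
-- cycle detected as failure to stabilise within n+1 rounds; objective: alternative algorithm.
-- Return values only; neither side mutates anything a caller observes.

-- ===== PORT A =====

-- out_adj[u]: KeyError (missing key) is excluded by Pre_; .getD [] is a stand-in there
def pwEdges (adj : PySem.Dict Int (List Int)) (u : Int) : List Int :=
  (adj.get? u).getD []

-- sum of the nonnegative parts of an indegree array (termination measure only)
def liS (xs : List Int) : Nat := (xs.map Int.toNat).sum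

-- one step of "indeg[v] -= 1; if indeg[v]==0: queue.append(v)" on state (indeg, queue);
-- v out of range = IndexError in Python, excluded by Pre_ (the step then skips)
def stepDec (s : List Int × List Int) (v : Int) : List Int × List Int :=
  match PySem.List.pyGet? s.1 v with
  | none => s
  | some o =>
      (PySem.List.pySetD s.1 v (o - 1), if o - 1 = 0 then s.2 ++ [v] else s.2)

theorem liS_set (xs : List Int) (k : Nat) (v : Int) (h : k < xs.length) :
    liS (xs.set k v) + xs[k].toNat = liS xs + v.toNat := by
  induction xs generalizing k with
  | nil => simp at h
  | cons x xs ih =>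
      cases k with
      | zero => simp [liS]; omega
      | succ k =>
          simp only [List.set_cons_succ, List.getElem_cons_succ]
          have := ih k (by simpa using h)
          simp [liS] at this ⊢
          omega

theorem stepDec_bound (s : List Int × List Int) (v : Int) :
    liS (stepDec s v).1 + (stepDec s v).2.length ≤ liS s.1 + s.2.length := by
  cases hg : PySem.List.pyGet? s.1 v with
  | none => simp [stepDec, hg]
  | some o =>
      have hg' := hg
      simp only [PySem.List.pyGet?] at hg'
      cases hk : PySem.List.pyIdx? s.1.length v with
      | none => rw [hk] at hg'; simp at hg'
      | some k =>
          rw [hk] at hg'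
          simp only [Option.bind_some] at hg'
          obtain ⟨hlt, hgk⟩ := List.getElem?_eq_some_iff.mp hg'
          have hset : PySem.List.pySetD s.1 v (o - 1) = s.1.set k (o - 1) := by
            simp [PySem.List.pySetD, PySem.List.pySet?, hk]
          have hsum := liS_set s.1 k (o - 1) hlt
          rw [hgk] at hsum
          simp only [stepDec, hg, hset]
          by_cases ho : o - 1 = 0
          · rw [ho] at hsum; simp [ho]; omega
          · simp [ho]; omega

theorem foldDec_bound (es : List Int) :
    ∀ s : List Int × List Int,
      liS (es.foldl stepDec s).1 + (es.foldl stepDec s).2.length ≤ liS s.1 + s.2.length := by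
  induction es with
  | nil => intro s; simp
  | cons v es ih =>
      intro s
      calc liS ((v :: es).foldl stepDec s).1 + ((v :: es).foldl stepDec s).2.length
          = liS (es.foldl stepDec (stepDec s v)).1 + (es.foldl stepDec (stepDec s v)).2.length := by
            simp [List.foldl_cons]
        _ ≤ liS (stepDec s v).1 + (stepDec s v).2.length := ih _
        _ ≤ liS s.1 + s.2.length := stepDec_bound s v

theorem foldDec_bound' (es : List Int) (indeg q : List Int) :
    liS (es.foldl stepDec (indeg, q)).1 + (es.foldl stepDec (indeg, q)).2.length ≤
      liS indeg + q.length :=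
  foldDec_bound es (indeg, q)

-- while dq: u = dq.popleft(); topo.append(u); for v in out_adj[u]: indeg[v]-=1; if 0: dq.append(v)
def kahnA (adj : PySem.Dict Int (List Int)) (indeg : List Int) (dq : List Int) (topo : List Int) :
    List Int :=
  match dq with
  | [] => topo
  | u :: rest =>
      -- s = state after the inner for-loop over out_adj[u]
      kahnA adj ((pwEdges adj u).foldl stepDec (indeg, rest)).1
        ((pwEdges adj u).foldl stepDec (indeg, rest)).2 (topo ++ [u])
termination_by liS indeg + dq.length
decreasing_by
  have := foldDec_bound' (pwEdges adj u) indeg rest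
  simp only [List.length_cons]
  omega

def propagate_windows (n : Int) (out_adj : List (Int × List Int)) (assigned : List (Int × Int)) : Option (List Int × List Int) :=
  let adj := PySem.Dict.ofList out_adj
  let earliest0 : List Int := List.replicate (n + 1).toNat 1
  let latest0 : List Int := List.replicate (n + 1).toNat n
  let el := (PySem.Dict.ofList assigned).items.foldl
      (fun (p : List Int × List Int) um =>
        (PySem.List.pySetD p.1 um.1 um.2, PySem.List.pySetD p.2 um.1 um.2))
      (earliest0, latest0)
  let indeg := (PySem.List.pyRange 1 (n + 1) 1).foldl
      (fun ind u => (pwEdges adj u).foldl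
        (fun ind v => PySem.List.pySetD ind v (PySem.List.pyGetD ind v 0 + 1)) ind)
      (List.replicate (n + 1).toNat (0 : Int))
  let dq := (PySem.List.pyRange 1 (n + 1) 1).filter
      (fun u => PySem.List.pyGetD indeg u 0 == 0)
  let topo := kahnA adj indeg dq []
  if (topo.length : Int) < n then none
  else
    let e2 := topo.foldl
      (fun e u => (pwEdges adj u).foldl
        (fun e v => PySem.List.pySetD e v
          (max (PySem.List.pyGetD e v 0) (PySem.List.pyGetD e u 0 + 1))) e) el.1
    let l2 := topo.reverse.foldl
      (fun l u => (pwEdges adj u).foldl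
        (fun l v => PySem.List.pySetD l u
          (min (PySem.List.pyGetD l u 0) (PySem.List.pyGetD l v 0 - 1))) l) el.2
    if (PySem.List.pyRange 1 (n + 1) 1).any
        (fun u => PySem.List.pyGetD e2 u 0 > PySem.List.pyGetD l2 u 0) then none
    else some (e2, l2)

-- ===== PORT B =====

-- if earliest[u] + 1 > earliest[v]: earliest[v] = earliest[u] + 1; changed = True
def pwRelaxE (s : List Int × Bool) (u v : Int) : List Int × Bool :=
  if PySem.List.pyGetD s.1 u 0 + 1 > PySem.List.pyGetD s.1 v 0 then
    (PySem.List.pySetD s.1 v (PySem.List.pyGetD s.1 u 0 + 1), true)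
  else s

-- one relaxation round: changed = False; for u in range(1, n+1): for v in out_adj[u]: relax
def pwRoundE (adj : PySem.Dict Int (List Int)) (n : Int) (e : List Int) : List Int × Bool :=
  (PySem.List.pyRange 1 (n + 1) 1).foldl
    (fun s u => (pwEdges adj u).foldl (fun s v => pwRelaxE s u v) s) (e, false)

-- for _ in range(fuel): round; if not changed: break   (returns (earliest, changed))
def pwLoopE (adj : PySem.Dict Int (List Int)) (n : Int) : Nat → List Int → List Int × Bool
  | 0, e => (e, false)
  | 1, e => pwRoundE adj n e
  | (k + 2), e =>
      let s := pwRoundE adj n e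
      if s.2 then pwLoopE adj n (k + 1) s.1 else s

-- if latest[v] - 1 < latest[u]: latest[u] = latest[v] - 1; changed = True
def pwRelaxL (s : List Int × Bool) (u v : Int) : List Int × Bool :=
  if PySem.List.pyGetD s.1 v 0 - 1 < PySem.List.pyGetD s.1 u 0 then
    (PySem.List.pySetD s.1 u (PySem.List.pyGetD s.1 v 0 - 1), true)
  else s

-- one round: changed = False; for u in range(n, 0, -1): for v in out_adj[u]: relax
def pwRoundL (adj : PySem.Dict Int (List Int)) (n : Int) (l : List Int) : List Int × Bool :=
  (PySem.List.pyRange n 0 (-1)).foldl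
    (fun s u => (pwEdges adj u).foldl (fun s v => pwRelaxL s u v) s) (l, false)

def pwLoopL (adj : PySem.Dict Int (List Int)) (n : Int) : Nat → List Int → List Int × Bool
  | 0, l => (l, false)
  | 1, l => pwRoundL adj n l
  | (k + 2), l =>
      let s := pwRoundL adj n l
      if s.2 then pwLoopL adj n (k + 1) s.1 else s

def propagate_windows_alt (n : Int) (out_adj : List (Int × List Int)) (assigned : List (Int × Int)) : Option (List Int × List Int) :=
  let adj := PySem.Dict.ofList out_adj
  let earliest0 : List Int := List.replicate (n + 1).toNat 1
  let latest0 : List Int := List.replicate (n + 1).toNat n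
  let el := (PySem.Dict.ofList assigned).items.foldl
      (fun (p : List Int × List Int) um =>
        (PySem.List.pySetD p.1 um.1 um.2, PySem.List.pySetD p.2 um.1 um.2))
      (earliest0, latest0)
  let r := pwLoopE adj n (n + 1).toNat el.1
  if r.2 then none
  else
    let rl := pwLoopL adj n (n + 1).toNat el.2
    if (PySem.List.pyRange 1 (n + 1) 1).any
        (fun u => PySem.List.pyGetD r.1 u 0 > PySem.List.pyGetD rl.1 u 0) then none
    else some (r.1, rl.1)

-- ===== PRECONDITION & SPEC =====

-- Pre_ excludes exactly the inputs where A raises (a key 1..n missing from out_adj, an edge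
-- target or assigned key outside the valid index range) plus edge targets outside 1..n, on
-- which A may still pop a vertex with no out_adj key (KeyError) or silently alias array
-- cells through index 0 / negative-index wraparound — a defensible-corner artefact.
def Pre_propagate_windows (n : Int) (out_adj : List (Int × List Int)) (assigned : List (Int × Int)) : Prop :=
  ((((PySem.Dict.ofList out_adj).keys.filter (fun u => decide (1 ≤ u ∧ u ≤ n))).length : Int) = max n 0) ∧
  (∀ p ∈ (PySem.Dict.ofList out_adj).items, 1 ≤ p.1 → p.1 ≤ n → ∀ v ∈ p.2, 1 ≤ v ∧ v ≤ n) ∧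
  (∀ p ∈ assigned, PySem.Raise.InRange (n + 1).toNat p.1)

instance (n : Int) (out_adj : List (Int × List Int)) (assigned : List (Int × Int)) : Decidable (Pre_propagate_windows n out_adj assigned) := by
  unfold Pre_propagate_windows; infer_instance

def pvWitness_propagate_windows : Int × (List (Int × List Int)) × (List (Int × Int)) :=
  (3, [(1, [2]), (2, [3]), (3, [])], [(2, 2)])

def Spec_propagate_windows (n : Int) (out_adj : List (Int × List Int)) (assigned : List (Int × Int)) (out : Option (List Int × List Int)) : Prop := out = propagate_windows_alt n out_adj assigned
instance (n : Int) (out_adj : List (Int × List Int)) (assigned : List (Int × Int)) (out : Option (List Int × List Int)) : Decidable (Spec_propagate_windows n out_adj assigned out) := by unfold Spec_propagate_windows; infer_instance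

-- ===== CLAIM (what is proved, stated in full; the proofs are below) =====
def Claim_equal_propagate_windows : Prop := ∀ (n : Int) (out_adj : List (Int × List Int)) (assigned : List (Int × Int)), Dom_propagate_windows n out_adj assigned → Pre_propagate_windows n out_adj assigned → Spec_propagate_windows n out_adj assigned (propagate_windows n out_adj assigned)

-- ===== LEMMAS AND PROOFS =====

-- ---- array access bridges ----

def gi (l : List Int) (i : Int) : Int := PySem.List.pyGetD l i 0

theorem gi_eq (l : List Int) (w : Int) (h : 0 ≤ w) : gi l w = l.getD w.toNat 0 := by
  have hw : w = ((w.toNat : Nat) : Int) := (Int.toNat_of_nonneg h).symm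
  rw [gi]
  conv_lhs => rw [hw]
  exact PySem.List.pyGetD_natCast l w.toNat 0

theorem set_eq (l : List Int) (v : Int) (x : Int) (h : 0 ≤ v) :
    PySem.List.pySetD l v x = l.set v.toNat x := by
  have hv : v = ((v.toNat : Nat) : Int) := (Int.toNat_of_nonneg h).symm
  conv_lhs => rw [hv]
  exact PySem.List.pySetD_natCast l v.toNat x

theorem length_setD (l : List Int) (v x : Int) (h : 0 ≤ v) :
    (PySem.List.pySetD l v x).length = l.length := by
  rw [set_eq l v x h]; simp

theorem gi_set (l : List Int) (v x w : Int) (hv : 0 ≤ v) (hw : 0 ≤ w) :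
    gi (PySem.List.pySetD l v x) w =
      if w = v ∧ v < (l.length : Int) then x else gi l w := by
  rw [set_eq l v x hv, gi_eq _ _ hw, gi_eq _ _ hw]
  simp only [List.getD]
  by_cases hwv : w = v
  · subst hwv
    by_cases hlt : w < (l.length : Int)
    · rw [List.getElem?_set_self (by omega)]
      simp [hlt]
    · rw [List.getElem?_eq_none (by simp; omega), List.getElem?_eq_none (by omega)]
      simp [hlt]
  · rw [List.getElem?_set_ne (by omega : v.toNat ≠ w.toNat)]
    simp [hwv]

theorem gi_set_self (l : List Int) (v : Int) (hv : 0 ≤ v) :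
    PySem.List.pySetD l v (gi l v) = l := by
  rw [set_eq l v _ hv, gi_eq _ _ hv]
  by_cases hlt : v.toNat < l.length
  · have : l.getD v.toNat 0 = l[v.toNat] := List.getD_eq_getElem l 0 hlt
    rw [this, List.set_getElem_self]
  · exact List.set_eq_of_length_le (by omega)

theorem list_ext_gi (e f : List Int) (hl : e.length = f.length)
    (h : ∀ i : Int, 0 ≤ i → gi e i = gi f i) : e = f := by
  apply List.ext_getElem hl
  intro k h1 h2
  have := h (k : Int) (by positivity)
  rw [gi_eq _ _ (by positivity), gi_eq _ _ (by positivity)] at this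
  simpa [List.getD, List.getElem?_eq_getElem, h1, h2] using this

-- ---- generic relaxation machinery ----

def rstep (e : List Int) (p : Int × Int) : List Int :=
  PySem.List.pySetD e p.2 (max (gi e p.2) (gi e p.1 + 1))

def rfold (es : List (Int × Int)) (e : List Int) : List Int := es.foldl rstep e

def cstep (s : List Int × Bool) (p : Int × Int) : List Int × Bool :=
  if gi s.1 p.1 + 1 > gi s.1 p.2 then
    (PySem.List.pySetD s.1 p.2 (gi s.1 p.1 + 1), true)
  else s

def cfold (es : List (Int × Int)) (s : List Int × Bool) : List Int × Bool := es.foldl cstep s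

def GoodP (p : Int × Int) : Prop := 0 ≤ p.1 ∧ 0 ≤ p.2

theorem length_rstep (e : List Int) (p : Int × Int) (hp : GoodP p) :
    (rstep e p).length = e.length := length_setD _ _ _ hp.2

theorem length_rfold (es : List (Int × Int)) (e : List Int) (hes : ∀ p ∈ es, GoodP p) :
    (rfold es e).length = e.length := by
  induction es generalizing e with
  | nil => rfl
  | cons p es ih =>
      rw [rfold, List.foldl_cons, ← rfold, ih _ (fun q hq => hes q (by simp [hq])),
        length_rstep _ _ (hes p (by simp))]

theorem gi_rstep_le (e : List Int) (p : Int × Int) (hp : GoodP p) (i : Int) (hi : 0 ≤ i) :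
    gi e i ≤ gi (rstep e p) i := by
  rw [rstep, gi_set _ _ _ _ hp.2 hi]
  split
  · rename_i h; rcases h with ⟨h1, _⟩; subst h1; exact le_max_left _ _
  · exact le_rfl

theorem gi_rfold_le (es : List (Int × Int)) (e : List Int) (hes : ∀ p ∈ es, GoodP p)
    (i : Int) (hi : 0 ≤ i) : gi e i ≤ gi (rfold es e) i := by
  induction es generalizing e with
  | nil => exact le_rfl
  | cons p es ih =>
      rw [rfold, List.foldl_cons, ← rfold]
      exact le_trans (gi_rstep_le e p (hes p (by simp)) i hi)
        (ih _ (fun q hq => hes q (by simp [hq])))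

theorem gi_rfold_bound (es : List (Int × Int)) (f : List Int)
    (hf : ∀ p ∈ es, gi f p.1 + 1 ≤ gi f p.2) :
    ∀ (e : List Int), (∀ p ∈ es, GoodP p) → e.length = f.length →
      (∀ i : Int, 0 ≤ i → gi e i ≤ gi f i) →
      ∀ i : Int, 0 ≤ i → gi (rfold es e) i ≤ gi f i := by
  induction es with
  | nil => intro e _ _ he i hi; exact he i hi
  | cons p es ih =>
      intro e hes hl he i hi
      rw [rfold, List.foldl_cons, ← rfold]
      refine ih (fun q hq => hf q (by simp [hq])) _ (fun q hq => hes q (by simp [hq]))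
        (by rw [length_rstep _ _ (hes p (by simp))]; exact hl) ?_ i hi
      intro j hj
      rw [rstep, gi_set _ _ _ _ (hes p (by simp)).2 hj]
      split
      · rename_i h; rcases h with ⟨h1, _⟩; subst h1
        exact max_le (he _ hj) (by
          have := he p.1 (hes p (by simp)).1
          have := hf p (by simp)
          omega)
      · exact he j hj

theorem gi_rfold_untouched (es : List (Int × Int)) (e : List Int)
    (hes : ∀ p ∈ es, GoodP p) (i : Int) (hi : 0 ≤ i) (hni : ∀ p ∈ es, p.2 ≠ i) :
    gi (rfold es e) i = gi e i := by
  induction es generalizing e with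
  | nil => rfl
  | cons p es ih =>
      rw [rfold, List.foldl_cons, ← rfold,
        ih _ (fun q hq => hes q (by simp [hq])) (fun q hq => hni q (by simp [hq]))]
      rw [rstep, gi_set _ _ _ _ (hes p (by simp)).2 hi]
      have := hni p (by simp)
      rw [if_neg (fun hc => this hc.1.symm)]

theorem gi_rfold_reach (es : List (Int × Int)) (hes : ∀ p ∈ es, GoodP p)
    (p : Int × Int) (hp : p ∈ es) (e : List Int) (hlen : p.2 < (e.length : Int))
    (c : Int) (hc : c ≤ gi e p.1) : c + 1 ≤ gi (rfold es e) p.2 := by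
  induction es generalizing e with
  | nil => simp at hp
  | cons q es ih =>
      rw [rfold, List.foldl_cons, ← rfold]
      rcases List.mem_cons.mp hp with h | h
      · subst h
        have h2 : c + 1 ≤ gi (rstep e p) p.2 := by
          rw [rstep, gi_set _ _ _ _ (hes p (by simp)).2 (hes p (by simp)).2]
          simp [hlen]
          right
          have := hc; omega
        exact le_trans h2 (gi_rfold_le es _ (fun q hq => hes q (by simp [hq])) _ (hes p hp).2)
      · refine ih (fun r hr => hes r (by simp [hr])) h _ ?_ ?_
        · rw [length_rstep _ _ (hes q (by simp))]; exact hlen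
        · exact le_trans hc (gi_rstep_le e q (hes q (by simp)) _ (hes p hp).1)

theorem gi_rfold_ub (es : List (Int × Int)) (hes : ∀ p ∈ es, GoodP p)
    (e : List Int) (v : Int) (hv : 0 ≤ v) :
    gi (rfold es e) v ≤ gi e v ∨
      ∃ p ∈ es, p.2 = v ∧ gi (rfold es e) v ≤ gi (rfold es e) p.1 + 1 := by
  induction es using List.reverseRecOn with
  | nil => left; exact le_rfl
  | append_singleton es p ih =>
      have hes' : ∀ q ∈ es, GoodP q := fun q hq => hes q (by simp [hq])
      have hp : GoodP p := hes p (by simp)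
      have hF : rfold (es ++ [p]) e = rstep (rfold es e) p := by
        rw [rfold, List.foldl_append, List.foldl_cons, List.foldl_nil]; rfl
      have hgv : gi (rstep (rfold es e) p) v =
          if v = p.2 ∧ p.2 < ((rfold es e).length : Int) then
            max (gi (rfold es e) p.2) (gi (rfold es e) p.1 + 1)
          else gi (rfold es e) v := by
        simp only [rstep]; rw [gi_set _ _ _ _ hp.2 hv]
      have hmono : ∀ i : Int, 0 ≤ i → gi (rfold es e) i ≤ gi (rstep (rfold es e) p) i :=
        fun i hi => gi_rstep_le _ _ hp i hi
      rw [hF, hgv]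
      by_cases hveq : v = p.2 ∧ p.2 < ((rfold es e).length : Int)
      · rw [if_pos hveq]
        by_cases hside : gi (rfold es e) p.1 + 1 ≤ gi (rfold es e) p.2
        · rw [max_eq_left hside]
          rcases ih hes' with h | ⟨q, hq, hq2, hq3⟩
          · left; rw [hveq.1]; rw [hveq.1] at h; exact h
          · right
            refine ⟨q, by simp [hq], hq2, ?_⟩
            rw [hveq.1] at hq3
            exact le_trans hq3 (by have := hmono q.1 (hes q (by simp [hq])).1; omega)
        · rw [max_eq_right (by omega)]
          right
          exact ⟨p, by simp, hveq.1.symm, by have := hmono p.1 hp.1; omega⟩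
      · rw [if_neg hveq]
        rcases ih hes' with h | ⟨q, hq, hq2, hq3⟩
        · left; exact h
        · right
          exact ⟨q, by simp [hq], hq2,
            le_trans hq3 (by have := hmono q.1 (hes q (by simp [hq])).1; omega)⟩

-- ---- conditional (flagged) fold vs rfold ----

theorem cfold_fst (es : List (Int × Int)) (s : List Int × Bool)
    (hes : ∀ p ∈ es, GoodP p) : (cfold es s).1 = rfold es s.1 := by
  induction es generalizing s with
  | nil => rfl
  | cons p es ih =>
      rw [cfold, List.foldl_cons, ← cfold, rfold, List.foldl_cons, ← rfold,
        ih _ (fun q hq => hes q (by simp [hq]))]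
      congr 1
      simp only [cstep, rstep]
      split
      · rename_i h
        simp only
        rw [max_eq_right (by omega)]
      · rename_i h
        rw [max_eq_left (by omega)]
        exact (gi_set_self s.1 p.2 (hes p (by simp)).2).symm

theorem cfold_flag_true (es : List (Int × Int)) (e : List Int) :
    (cfold es (e, true)).2 = true := by
  induction es generalizing e with
  | nil => rfl
  | cons p es ih =>
      rw [cfold, List.foldl_cons, ← cfold, cstep]
      split
      · exact ih _
      · exact ih e

theorem cfold_flag_false (es : List (Int × Int)) (e : List Int)
    (h : (cfold es (e, false)).2 = false) :
    (cfold es (e, false)).1 = e ∧ ∀ p ∈ es, gi e p.1 + 1 ≤ gi e p.2 := by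
  induction es generalizing e with
  | nil => exact ⟨rfl, by simp⟩
  | cons p es ih =>
      rw [cfold, List.foldl_cons, ← cfold] at h ⊢
      by_cases hcond : gi e p.1 + 1 > gi e p.2
      · exfalso
        simp only [cstep, if_pos hcond] at h
        simp [cfold_flag_true] at h
      · simp only [cstep, if_neg hcond] at h ⊢
        obtain ⟨h1, h2⟩ := ih e h
        refine ⟨h1, ?_⟩
        intro q hq
        rcases List.mem_cons.mp hq with rfl | hq'
        · omega
        · exact h2 q hq'

theorem cfold_closed (es : List (Int × Int)) (e : List Int)
    (hc : ∀ p ∈ es, gi e p.1 + 1 ≤ gi e p.2) : cfold es (e, false) = (e, false) := by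
  induction es with
  | nil => rfl
  | cons p es ih =>
      rw [cfold, List.foldl_cons, ← cfold]
      have : cstep (e, false) p = (e, false) := by
        simp only [cstep]
        rw [if_neg (by have := hc p (by simp); omega)]
      rw [this]
      exact ih (fun q hq => hc q (by simp [hq]))

-- ---- flattening nested for-loops over edges ----

theorem foldl_nested_flatMap {σ : Type} (l : List Int) (g : Int → List Int)
    (F : σ → Int × Int → σ) (s : σ) :
    l.foldl (fun s u => (g u).foldl (fun s v => F s (u, v)) s) s =
      (l.flatMap (fun u => (g u).map (fun v => (u, v)))).foldl F s := by
  induction l generalizing s with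
  | nil => rfl
  | cons u l ih =>
      rw [List.flatMap_cons, List.foldl_append, List.foldl_cons, List.foldl_map, ih]


-- ---- the flattened edge lists and the generic round loop ----

def flatE (adj : PySem.Dict Int (List Int)) (l : List Int) : List (Int × Int) :=
  l.flatMap (fun u => (pwEdges adj u).map (fun v => (u, v)))

theorem mem_flatE (adj : PySem.Dict Int (List Int)) (l : List Int) (p : Int × Int) :
    p ∈ flatE adj l ↔ p.1 ∈ l ∧ p.2 ∈ pwEdges adj p.1 := by
  cases p with
  | mk a b =>
      simp only [flatE, List.mem_flatMap, List.mem_map, Prod.mk.injEq]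
      constructor
      · rintro ⟨u, hu, v, hv, rfl, rfl⟩; exact ⟨hu, hv⟩
      · rintro ⟨ha, hb⟩; exact ⟨a, ha, b, hb, rfl, rfl⟩

def gLoop (es : List (Int × Int)) : Nat → List Int → List Int × Bool
  | 0, e => (e, false)
  | 1, e => cfold es (e, false)
  | (k + 2), e =>
      let s := cfold es (e, false)
      if s.2 then gLoop es (k + 1) s.1 else s

theorem roundE_eq (adj : PySem.Dict Int (List Int)) (n : Int) (e : List Int) :
    pwRoundE adj n e = cfold (flatE adj (PySem.List.pyRange 1 (n + 1) 1)) (e, false) := by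
  rw [pwRoundE, flatE, cfold]
  exact foldl_nested_flatMap (PySem.List.pyRange 1 (n + 1) 1) (pwEdges adj) cstep (e, false)

theorem pwLoopE_eq (adj : PySem.Dict Int (List Int)) (n : Int) :
    ∀ (fuel : Nat) (e : List Int),
      pwLoopE adj n fuel e = gLoop (flatE adj (PySem.List.pyRange 1 (n + 1) 1)) fuel e := by
  intro fuel
  induction fuel using Nat.strong_induction_on with
  | _ fuel ih =>
      intro e
      match fuel with
      | 0 => rfl
      | 1 => exact roundE_eq adj n e
      | (k + 2) =>
          rw [pwLoopE, gLoop]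
          simp only [roundE_eq adj n e]
          split
          · exact ih (k + 1) (by omega) _
          · rfl

-- ---- negation transport for the latest (min) pass ----

def nm (l : List Int) : List Int := l.map (fun x => -x)

theorem gi_nm (l : List Int) (i : Int) : gi (nm l) i = - gi l i := by
  have h : gi (nm l) i = PySem.List.pyGetD (l.map (fun x => -x)) i ((fun x : Int => -x) 0) := by
    simp [gi, nm]
  rw [h, PySem.List.pyGetD_map]
  rfl

theorem nm_nm (l : List Int) : nm (nm l) = l := by
  simp [nm, List.map_map]

theorem length_nm (l : List Int) : (nm l).length = l.length := by simp [nm]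

theorem nm_set (l : List Int) (v x : Int) (hv : 0 ≤ v) :
    nm (PySem.List.pySetD l v x) = PySem.List.pySetD (nm l) v (-x) := by
  rw [set_eq _ _ _ hv, set_eq _ _ _ hv, nm, nm, List.map_set]

theorem relaxL_eq (s : List Int × Bool) (u v : Int) (hu : 0 ≤ u) :
    pwRelaxL s u v =
      (nm (cstep (nm s.1, s.2) (v, u)).1, (cstep (nm s.1, s.2) (v, u)).2) := by
  have h1 : gi (nm s.1) v = - gi s.1 v := gi_nm _ _
  have h2 : gi (nm s.1) u = - gi s.1 u := gi_nm _ _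
  have hgi : ∀ (l : List Int) (i : Int), PySem.List.pyGetD l i 0 = gi l i := fun _ _ => rfl
  simp only [pwRelaxL, cstep, hgi]
  by_cases hc : gi s.1 v - 1 < gi s.1 u
  · rw [if_pos hc, if_pos (show gi (nm s.1, s.2).1 (v, u).1 + 1 > gi (nm s.1, s.2).1 (v, u).2 by
        simp only [h1, h2]; omega)]
    simp only
    rw [show gi (nm s.1) v + 1 = -(gi s.1 v - 1) by rw [h1]; ring,
      ← nm_set _ _ _ hu, nm_nm]
  · rw [if_neg hc, if_neg (show ¬(gi (nm s.1, s.2).1 (v, u).1 + 1 > gi (nm s.1, s.2).1 (v, u).2) by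
        simp only [h1, h2]; omega)]
    simp [nm_nm]

theorem cfoldL_transport (es : List (Int × Int)) (h : ∀ p ∈ es, 0 ≤ p.1) :
    ∀ (s : List Int × Bool),
      es.foldl (fun s p => pwRelaxL s p.1 p.2) s =
        (nm (cfold (es.map Prod.swap) (nm s.1, s.2)).1,
          (cfold (es.map Prod.swap) (nm s.1, s.2)).2) := by
  induction es with
  | nil => intro s; cases s; simp [cfold, nm_nm]
  | cons p es ih =>
      intro s
      rw [List.foldl_cons, List.map_cons, cfold, List.foldl_cons, ← cfold]
      rw [relaxL_eq s p.1 p.2 (h p (by simp))]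
      rw [ih (fun q hq => h q (by simp [hq]))]
      simp only [nm_nm]
      rfl

theorem roundL_eq (adj : PySem.Dict Int (List Int)) (n : Int) (l : List Int) :
    pwRoundL adj n l =
      (nm (cfold ((flatE adj (PySem.List.pyRange n 0 (-1))).map Prod.swap) (nm l, false)).1,
        (cfold ((flatE adj (PySem.List.pyRange n 0 (-1))).map Prod.swap) (nm l, false)).2) := by
  have hflat : pwRoundL adj n l =
      (flatE adj (PySem.List.pyRange n 0 (-1))).foldl (fun s p => pwRelaxL s p.1 p.2) (l, false) := by
    rw [pwRoundL, flatE]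
    rw [foldl_nested_flatMap (PySem.List.pyRange n 0 (-1)) (pwEdges adj)
      (fun s p => pwRelaxL s p.1 p.2) (l, false)]
  rw [hflat, cfoldL_transport _ ?_ (l, false)]
  intro p hp
  rw [mem_flatE] at hp
  have := (PySem.List.mem_pyRange_neg_one).mp hp.1
  omega

theorem pwLoopL_eq (adj : PySem.Dict Int (List Int)) (n : Int) :
    ∀ (fuel : Nat) (l : List Int),
      pwLoopL adj n fuel l =
        (nm (gLoop ((flatE adj (PySem.List.pyRange n 0 (-1))).map Prod.swap) fuel (nm l)).1,
          (gLoop ((flatE adj (PySem.List.pyRange n 0 (-1))).map Prod.swap) fuel (nm l)).2) := by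
  intro fuel
  induction fuel using Nat.strong_induction_on with
  | _ fuel ih =>
      intro l
      match fuel with
      | 0 => simp [pwLoopL, gLoop, nm_nm]
      | 1 =>
          rw [pwLoopL, gLoop]
          exact roundL_eq adj n l
      | (k + 2) =>
          rw [pwLoopL, gLoop]
          simp only [roundL_eq adj n l]
          split
          · rename_i hflag
            rw [ih (k + 1) (by omega), nm_nm]
          · rfl

theorem gLoop_flag_false (es : List (Int × Int)) :
    ∀ (fuel : Nat) (e : List Int), (gLoop es fuel e).2 = false →
      fuel = 0 ∨ ∃ e', (cfold es (e', false)).2 = false := by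
  intro fuel
  induction fuel using Nat.strong_induction_on with
  | _ fuel ih =>
      intro e h
      match fuel with
      | 0 => exact Or.inl rfl
      | 1 => exact Or.inr ⟨e, h⟩
      | (k + 2) =>
          rw [gLoop] at h
          split at h
          · rcases ih (k + 1) (by omega) _ h with h0 | hw
            · omega
            · exact Or.inr hw
          · rename_i hflag
            exact Or.inr ⟨e, by simpa using hflag⟩

-- ---- A's latest pass as a negated max-fold ----

theorem lfold_transport (es : List (Int × Int)) (h : ∀ p ∈ es, 0 ≤ p.1) :
    ∀ (l : List Int),
      es.foldl (fun l p => PySem.List.pySetD l p.1 (min (gi l p.1) (gi l p.2 - 1))) l =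
        nm (rfold (es.map Prod.swap) (nm l)) := by
  induction es with
  | nil => intro l; simp [rfold, nm_nm]
  | cons p es ih =>
      intro l
      rw [List.foldl_cons, List.map_cons, rfold, List.foldl_cons, ← rfold,
        ih (fun q hq => h q (by simp [hq]))]
      congr 1
      simp only [rstep, Prod.swap]
      rw [gi_nm, gi_nm,
        show max (-gi l p.1) (-gi l p.2 + 1) = -(min (gi l p.1) (gi l p.2 - 1)) by
          rw [show (-gi l p.2 + 1 : Int) = -(gi l p.2 - 1) by ring, max_neg_neg],
        nm_set _ _ _ (h p (by simp))]


-- ---- counting remaining in-edges ----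

def nds (n : Int) : List Int := PySem.List.pyRange 1 (n + 1) 1

theorem mem_nds (n x : Int) : x ∈ nds n ↔ 1 ≤ x ∧ x < n + 1 :=
  PySem.List.mem_pyRange_one

def cnt (adj : PySem.Dict Int (List Int)) (w u : Int) : Int := ((pwEdges adj u).count w : Int)

def rem (n : Int) (adj : PySem.Dict Int (List Int)) (w : Int) (S : List Int) : Int :=
  ((nds n).map (fun x => if x ∈ S then 0 else cnt adj w x)).sum

def HEDGE (n : Int) (adj : PySem.Dict Int (List Int)) : Prop :=
  ∀ u ∈ nds n, ∀ v ∈ pwEdges adj u, v ∈ nds n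

theorem cnt_nonneg (adj : PySem.Dict Int (List Int)) (w u : Int) : 0 ≤ cnt adj w u := by
  simp [cnt]

theorem rem_nonneg (n : Int) (adj : PySem.Dict Int (List Int)) (w : Int) (S : List Int) :
    0 ≤ rem n adj w S := by
  apply List.sum_nonneg
  intro x hx
  simp only [List.mem_map] at hx
  obtain ⟨y, _, rfl⟩ := hx
  split
  · exact le_rfl
  · exact cnt_nonneg adj w y

theorem le_sum_of_mem (l : List Int) (f : Int → Int) (u : Int) (hu : u ∈ l)
    (hf : ∀ x ∈ l, 0 ≤ f x) : f u ≤ (l.map f).sum := by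
  induction l with
  | nil => simp at hu
  | cons x l ih =>
      rcases List.mem_cons.mp hu with rfl | hu'
      · simp only [List.map_cons, List.sum_cons]
        have : 0 ≤ (l.map f).sum := List.sum_nonneg (by
          intro y hy
          simp only [List.mem_map] at hy
          obtain ⟨z, hz, rfl⟩ := hy
          exact hf z (by simp [hz]))
        omega
      · simp only [List.map_cons, List.sum_cons]
        have := ih hu' (fun x hx => hf x (by simp [hx]))
        have h0 := hf x (by simp)
        omega

theorem nds_nodup (n : Int) : (nds n).Nodup := by
  unfold nds; exact PySem.List.nodup_pyRange_one 1 (n + 1)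

theorem rem_single_le (n : Int) (adj : PySem.Dict Int (List Int)) (w u : Int) (S : List Int)
    (hu : u ∈ nds n) (hnu : u ∉ S) : cnt adj w u ≤ rem n adj w S := by
  have := le_sum_of_mem (nds n) (fun x => if x ∈ S then 0 else cnt adj w x) u hu
    (by intro x _
        by_cases hx : x ∈ S
        · simp [hx]
        · simp [hx, cnt_nonneg])
  simp only [if_neg hnu] at this
  exact this

theorem sum_if_snoc (l : List Int) (f : Int → Int) (S : List Int) (u : Int)
    (hnd : l.Nodup) (hu : u ∈ l) (hnu : u ∉ S) :
    (l.map (fun x => if x ∈ S ++ [u] then 0 else f x)).sum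
      = (l.map (fun x => if x ∈ S then 0 else f x)).sum - f u := by
  induction l with
  | nil => simp at hu
  | cons x l ih =>
      simp only [List.map_cons, List.sum_cons]
      rcases List.mem_cons.mp hu with heq | hu'
      · subst heq
        have hxl : u ∉ l := (List.nodup_cons.mp hnd).1
        have hmap : (l.map (fun y => if y ∈ S ++ [u] then 0 else f y)) =
            l.map (fun y => if y ∈ S then 0 else f y) := by
          apply List.map_congr_left
          intro y hy
          have hyx : y ≠ u := fun h => hxl (h ▸ hy)
          simp [List.mem_append, hyx]
        rw [hmap]
        simp [hnu]
      · have hxu : x ≠ u := fun h => (List.nodup_cons.mp hnd).1 (h ▸ hu')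
        rw [ih (List.nodup_cons.mp hnd).2 hu']
        have hiff : (x ∈ S ++ [u]) ↔ x ∈ S := by simp [List.mem_append, hxu]
        by_cases hx : x ∈ S
        · simp only [if_pos (hiff.mpr hx), if_pos hx]; ring
        · simp only [if_neg (fun hc => hx (hiff.mp hc)), if_neg hx]; ring

theorem rem_snoc (n : Int) (adj : PySem.Dict Int (List Int)) (w u : Int) (S : List Int)
    (hu : u ∈ nds n) (hnu : u ∉ S) :
    rem n adj w (S ++ [u]) = rem n adj w S - cnt adj w u := by
  rw [rem, rem]
  exact sum_if_snoc (nds n) (cnt adj w) S u (nds_nodup n) hu hnu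

theorem rem_pos_witness (n : Int) (adj : PySem.Dict Int (List Int)) (w : Int) (S : List Int)
    (h : 0 < rem n adj w S) : ∃ x ∈ nds n, x ∉ S ∧ 0 < cnt adj w x := by
  by_contra hc
  push_neg at hc
  have h2 : rem n adj w S ≤ ((nds n).map (fun _ => (0 : Int))).sum := by
    apply List.sum_le_sum
    intro x hx
    by_cases hxs : x ∈ S
    · simp [hxs]
    · simp only [if_neg hxs]
      exact hc x hx hxs
  simp only [List.map_const', List.sum_replicate, smul_zero] at h2
  omega

-- ---- the inner decrement loop of Kahn's algorithm ----

theorem gi_elem (l : List Int) (i : Int) (h0 : 0 ≤ i) (h1 : i < (l.length : Int)) :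
    gi l i = l[i.toNat]'(by omega) := by
  rw [gi_eq _ _ h0]
  exact List.getD_eq_getElem l 0 (by omega)

theorem stepDec_eq (indeg q : List Int) (v : Int) (h0 : 0 ≤ v) (h1 : v < (indeg.length : Int)) :
    stepDec (indeg, q) v =
      (PySem.List.pySetD indeg v (gi indeg v - 1),
        if gi indeg v - 1 = 0 then q ++ [v] else q) := by
  rw [stepDec]
  have : PySem.List.pyGet? indeg v = some (gi indeg v) := by
    rw [PySem.List.pyGet?_eq_some_getElem indeg h0 h1, gi_elem indeg v h0 h1]
  rw [this]

theorem qf (es : List Int) : ∀ (indeg q : List Int),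
    (∀ x ∈ es, 0 ≤ x ∧ x < (indeg.length : Int)) →
    (∀ w ∈ es, ((es.count w : Int) ≤ gi indeg w)) →
    (∀ w ∈ q, gi indeg w ≤ 0) → q.Nodup → (∀ w ∈ q, 0 ≤ w) →
    ((es.foldl stepDec (indeg, q)).1.length = indeg.length) ∧
    (∀ w : Int, 0 ≤ w → gi (es.foldl stepDec (indeg, q)).1 w = gi indeg w - (es.count w : Int)) ∧
    (es.foldl stepDec (indeg, q)).2.Nodup ∧
    (∀ w : Int, w ∈ (es.foldl stepDec (indeg, q)).2 ↔
      w ∈ q ∨ (w ∈ es ∧ 0 < gi indeg w ∧ gi indeg w = (es.count w : Int))) := by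
  induction es with
  | nil =>
      intro indeg q _ _ _ hqn _
      refine ⟨rfl, by simp, hqn, by simp⟩
  | cons v es ih =>
      intro indeg q hb hcnt hq hqn hq0
      have hv0 : 0 ≤ v := (hb v (by simp)).1
      have hv1 : v < (indeg.length : Int) := (hb v (by simp)).2
      have hvc : (1 : Int) ≤ ((v :: es).count v : Int) := by
        have : 0 < (v :: es).count v := List.count_pos_iff.mpr (by simp)
        omega
      have hgv : 1 ≤ gi indeg v := le_trans hvc (hcnt v (by simp))
      rw [List.foldl_cons, stepDec_eq indeg q v hv0 hv1]
      set indeg1 := PySem.List.pySetD indeg v (gi indeg v - 1) with hindeg1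
      have hlen1 : indeg1.length = indeg.length := length_setD _ _ _ hv0
      have hgi1 : ∀ w : Int, 0 ≤ w → gi indeg1 w = if w = v then gi indeg v - 1 else gi indeg w := by
        intro w hw
        rw [hindeg1, gi_set _ _ _ _ hv0 hw]
        by_cases hwv : w = v
        · simp [hwv, hv1]
        · simp [hwv]
      set q1 : List Int := if gi indeg v - 1 = 0 then q ++ [v] else q with hq1
      have hq1n : q1.Nodup := by
        rw [hq1]
        split
        · rename_i h0
          refine List.nodup_append.mpr ⟨hqn, by simp, ?_⟩
          intro x hx y hy
          rw [List.mem_singleton] at hy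
          subst hy
          have := hq x hx
          intro hxv
          rw [hxv] at this
          omega
        · exact hqn
      have hq1m : ∀ w, w ∈ q1 ↔ w ∈ q ∨ (w = v ∧ gi indeg v = 1) := by
        intro w
        rw [hq1]
        split
        · rename_i h0
          simp only [List.mem_append, List.mem_singleton]
          constructor
          · rintro (h | rfl)
            · exact Or.inl h
            · exact Or.inr ⟨rfl, by omega⟩
          · rintro (h | ⟨rfl, _⟩)
            · exact Or.inl h
            · exact Or.inr rfl
        · rename_i h0
          constructor
          · exact Or.inl
          · rintro (h | ⟨rfl, h2⟩)
            · exact h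
            · omega
      have hq1v : ∀ w ∈ q1, gi indeg1 w ≤ 0 := by
        intro w hw
        rcases (hq1m w).mp hw with h | ⟨rfl, h2⟩
        · rw [hgi1 w (hq0 w h)]
          split
          · rename_i hwv; subst hwv; have := hq w h; omega
          · exact hq w h
        · rw [hgi1 w hv0]; simp; omega
      have hq10 : ∀ w ∈ q1, 0 ≤ w := by
        intro w hw
        rcases (hq1m w).mp hw with h | ⟨rfl, _⟩
        · exact hq0 w h
        · exact hv0
      have hb' : ∀ x ∈ es, 0 ≤ x ∧ x < (indeg1.length : Int) := by
        intro x hx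
        rw [hlen1]
        exact hb x (by simp [hx])
      have hcnt' : ∀ w ∈ es, ((es.count w : Int) ≤ gi indeg1 w) := by
        intro w hw
        rw [hgi1 w (hb w (by simp [hw])).1]
        have hc := hcnt w (by simp [hw])
        rw [List.count_cons] at hc
        by_cases hwv : w = v
        · subst hwv
          simp at hc
          rw [if_pos rfl]
          push_cast at hc ⊢
          omega
        · rw [if_neg hwv]
          simp [show ¬(v == w) = true by simp [Ne.symm hwv]] at hc
          omega
      obtain ⟨L1, G1, N1, M1⟩ := ih indeg1 q1 hb' hcnt' hq1v hq1n hq10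
      refine ⟨by rw [L1, hlen1], ?_, N1, ?_⟩
      · intro w hw
        rw [G1 w hw, List.count_cons]
        by_cases hwv : w = v
        · subst hwv
          rw [hgi1 w hw, if_pos rfl]
          simp
          push_cast
          omega
        · rw [hgi1 w hw, if_neg hwv]
          simp [show ¬(v == w) = true by simp [Ne.symm hwv]]
      · intro w
        rw [M1 w, hq1m w]
        by_cases hw : 0 ≤ w
        · have hmemv : w ∈ es ↔ 0 < (es.count w : Int) := by
            rw [← List.count_pos_iff]; push_cast; omega
          by_cases hwv : w = v
          · rw [hgi1 w hw, if_pos hwv]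
            have hgw : gi indeg w = gi indeg v := by rw [hwv]
            have hccN : (v :: es).count w = es.count w + 1 := by
              rw [List.count_cons]; simp [hwv]
            have hcc : (((v :: es).count w : Nat) : Int) = (es.count w : Int) + 1 := by
              rw [hccN]; push_cast; ring
            have hcv := hcnt w (by simp [hwv])
            constructor
            · rintro ((h | ⟨_, h2⟩) | ⟨hmem, h3, h4⟩)
              · exact Or.inl h
              · exact Or.inr ⟨by simp [hwv], by omega, by omega⟩
              · exact Or.inr ⟨by simp [hwv], by omega, by omega⟩
            · rintro (h | ⟨hmem, h3, h4⟩)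
              · exact Or.inl (Or.inl h)
              · by_cases h1 : gi indeg v = 1
                · exact Or.inl (Or.inr ⟨hwv, h1⟩)
                · exact Or.inr ⟨hmemv.mpr (by omega), by omega, by omega⟩
          · rw [hgi1 w hw, if_neg hwv]
            have hccN : (v :: es).count w = es.count w := by
              rw [List.count_cons]; simp [show (v == w) = false by simp [Ne.symm hwv]]
            have hcc : (((v :: es).count w : Nat) : Int) = (es.count w : Int) := by
              rw [hccN]
            constructor
            · rintro ((h | ⟨hv2, _⟩) | ⟨hmem, h3, h4⟩)
              · exact Or.inl h
              · exact absurd hv2 hwv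
              · exact Or.inr ⟨by simp [hmem], h3, by omega⟩
            · rintro (h | ⟨hmem, h3, h4⟩)
              · exact Or.inl (Or.inl h)
              · rcases List.mem_cons.mp hmem with h5 | h5
                · exact absurd h5 hwv
                · exact Or.inr ⟨h5, h3, by omega⟩
        · constructor
          · rintro ((h | ⟨hv2, _⟩) | ⟨hmem, _, _⟩)
            · exact absurd (hq0 w h) hw
            · exact absurd (hv2 ▸ hv0) hw
            · exact absurd (hb' w hmem).1 hw
          · rintro (h | ⟨hmem, _, _⟩)
            · exact absurd (hq0 w h) hw
            · exact absurd (hb w hmem).1 hw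

-- ---- Kahn loop invariant ----

def KINV (n : Int) (adj : PySem.Dict Int (List Int)) (indeg dq topo : List Int) : Prop :=
  indeg.length = (n + 1).toNat ∧
  (∀ w ∈ nds n, gi indeg w = rem n adj w topo) ∧
  topo.Nodup ∧ (∀ x ∈ topo, x ∈ nds n) ∧
  dq.Nodup ∧ (∀ x ∈ dq, x ∈ nds n) ∧ (∀ x ∈ dq, x ∉ topo) ∧
  (∀ w ∈ nds n, (w ∈ topo ∨ w ∈ dq) ↔ rem n adj w topo = 0) ∧
  (∀ X w Y, topo = X ++ w :: Y → rem n adj w X = 0)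

theorem snoc_split (T : List Int) (u : Int) (X Y : List Int) (w : Int)
    (h : T ++ [u] = X ++ w :: Y) :
    (∃ Y', T = X ++ w :: Y' ∧ Y = Y' ++ [u]) ∨ (X = T ∧ w = u ∧ Y = []) := by
  induction Y using List.reverseRecOn with
  | nil =>
      right
      have h1 : T = X := by
        have := congrArg List.dropLast h
        simpa using this
      have h2 : u = w := by
        have := congrArg List.getLast? h
        simpa using this
      exact ⟨h1.symm, h2.symm, rfl⟩
  | append_singleton Y' u' _ =>
      left
      have h2 : T ++ [u] = (X ++ w :: Y') ++ [u'] := by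
        rw [h]; simp
      have hu' : u = u' := by
        have h3 := congrArg List.getLast? h2
        rw [List.getLast?_concat, List.getLast?_concat] at h3
        exact Option.some.inj h3
      have hT : T = X ++ w :: Y' := by
        have h3 := congrArg List.dropLast h2
        rwa [List.dropLast_concat, List.dropLast_concat] at h3
      exact ⟨Y', hT, by rw [hu']⟩

theorem kinv_step (n : Int) (adj : PySem.Dict Int (List Int)) (he : HEDGE n adj)
    (indeg : List Int) (u : Int) (rest topo : List Int)
    (hinv : KINV n adj indeg (u :: rest) topo) :
    KINV n adj ((pwEdges adj u).foldl stepDec (indeg, rest)).1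
      ((pwEdges adj u).foldl stepDec (indeg, rest)).2 (topo ++ [u]) := by
  obtain ⟨hlen, hgi, htn, hts, hdn, hds, hdt, hiff, hsplit⟩ := hinv
  have hu : u ∈ nds n := hds u (by simp)
  have hn1 : 1 ≤ u ∧ u < n + 1 := (mem_nds n u).mp hu
  have hunt : u ∉ topo := hdt u (by simp)
  have hrn : rest.Nodup := (List.nodup_cons.mp hdn).2
  have hur : u ∉ rest := (List.nodup_cons.mp hdn).1
  have hL : (indeg.length : Int) = n + 1 := by rw [hlen]; omega
  set es := pwEdges adj u with hes
  have hbs : ∀ x ∈ es, 0 ≤ x ∧ x < (indeg.length : Int) := by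
    intro x hx
    have := (mem_nds n x).mp (he u hu x hx)
    omega
  have hcnts : ∀ w ∈ es, ((es.count w : Int) ≤ gi indeg w) := by
    intro w hw
    rw [hgi w (he u hu w hw)]
    exact rem_single_le n adj w u topo hu hunt
  have hqv : ∀ w ∈ rest, gi indeg w ≤ 0 := by
    intro w hw
    rw [hgi w (hds w (by simp [hw])),
      (hiff w (hds w (by simp [hw]))).mp (Or.inr (by simp [hw]))]
  have hq0 : ∀ w ∈ rest, 0 ≤ w := by
    intro w hw
    have := (mem_nds n w).mp (hds w (by simp [hw]))
    omega
  obtain ⟨QL, QG, QN, QM⟩ := qf es indeg rest hbs hcnts hqv hrn hq0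
  have hrem' : ∀ w, rem n adj w (topo ++ [u]) = rem n adj w topo - cnt adj w u :=
    fun w => rem_snoc n adj w u topo hu hunt
  have hcnt_eq : ∀ w, cnt adj w u = (es.count w : Int) := fun w => rfl
  refine ⟨by rw [QL, hlen], ?_, ?_, ?_, QN, ?_, ?_, ?_, ?_⟩
  · intro w hw
    have hw0 : 0 ≤ w := by have := (mem_nds n w).mp hw; omega
    rw [QG w hw0, hgi w hw, hrem' w, hcnt_eq w]
  · rw [List.nodup_append]
    refine ⟨htn, by simp, ?_⟩
    intro x hx y hy
    rw [List.mem_singleton] at hy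
    subst hy
    exact fun heq => hunt (heq ▸ hx)
  · intro x hx
    rcases List.mem_append.mp hx with h | h
    · exact hts x h
    · rw [List.mem_singleton] at h; subst h; exact hu
  · intro w hw
    rcases (QM w).mp hw with h | ⟨hmem, _, _⟩
    · exact hds w (by simp [h])
    · exact he u hu w hmem
  · intro w hw
    intro hmem
    rcases (QM w).mp hw with h | ⟨hmem2, hpos, _⟩
    · rcases List.mem_append.mp hmem with h2 | h2
      · exact hdt w (by simp [h]) h2
      · rw [List.mem_singleton] at h2; subst h2; exact hur h
    · have hwn : w ∈ nds n := he u hu w hmem2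
      rw [hgi w hwn] at hpos
      rcases List.mem_append.mp hmem with h2 | h2
      · have := (hiff w hwn).mp (Or.inl h2)
        omega
      · rw [List.mem_singleton] at h2; subst h2
        have := (hiff w hwn).mp (Or.inr (by simp))
        omega
  · intro w hw
    have hwle := rem_single_le n adj w u topo hu hunt
    have hnn := rem_nonneg n adj w (topo ++ [u])
    have hcn := cnt_nonneg adj w u
    constructor
    · rintro (hmem | hmem)
      · rcases List.mem_append.mp hmem with h | h
        · have := (hiff w hw).mp (Or.inl h)
          rw [hrem' w] at hnn ⊢
          omega
        · rw [List.mem_singleton] at h; subst h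
          have := (hiff w hw).mp (Or.inr (by simp))
          rw [hrem' w] at hnn ⊢
          omega
      · rcases (QM w).mp hmem with h | ⟨hmem2, hpos, heq⟩
        · have := (hiff w hw).mp (Or.inr (by simp [h]))
          rw [hrem' w] at hnn ⊢
          omega
        · rw [hrem' w, hcnt_eq w, ← hgi w hw]
          omega
    · intro h
      by_cases h0 : rem n adj w topo = 0
      · rcases (hiff w hw).mpr h0 with h2 | h2
        · exact Or.inl (List.mem_append.mpr (Or.inl h2))
        · rcases List.mem_cons.mp h2 with rfl | h3
          · exact Or.inl (List.mem_append.mpr (Or.inr (by simp)))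
          · exact Or.inr ((QM w).mpr (Or.inl h3))
      · have hpos : 0 < rem n adj w topo := by
          have := rem_nonneg n adj w topo
          omega
        have heq : gi indeg w = (es.count w : Int) := by
          rw [hgi w hw]
          rw [hrem' w, hcnt_eq w] at h
          omega
        have hmem : w ∈ es := by
          rw [← List.count_pos_iff]
          have := hcnt_eq w
          rw [hgi w hw] at heq
          omega
        exact Or.inr ((QM w).mpr (Or.inr ⟨hmem, by rw [hgi w hw]; omega, heq⟩))
  · intro X w Y hXY
    rcases snoc_split topo u X Y w hXY with ⟨Y', hT, _⟩ | ⟨hX, hwu, _⟩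
    · exact hsplit X w Y' hT
    · subst hX; subst hwu
      exact (hiff w hu).mp (Or.inr (by simp))

theorem kahn_main (n : Int) (adj : PySem.Dict Int (List Int)) (he : HEDGE n adj) :
    ∀ (indeg dq topo : List Int), KINV n adj indeg dq topo →
      (kahnA adj indeg dq topo).Nodup ∧
      (∀ x ∈ kahnA adj indeg dq topo, x ∈ nds n) ∧
      (∀ X w Y, kahnA adj indeg dq topo = X ++ w :: Y → rem n adj w X = 0) ∧
      (∀ w ∈ nds n, w ∈ kahnA adj indeg dq topo ↔ rem n adj w (kahnA adj indeg dq topo) = 0) := by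
  intro indeg dq topo
  induction indeg, dq, topo using kahnA.induct adj with
  | case1 indeg topo =>
      intro hinv
      obtain ⟨_, _, htn, hts, _, _, _, hiff, hsplit⟩ := hinv
      rw [kahnA]
      refine ⟨htn, hts, hsplit, ?_⟩
      intro w hw
      rw [← hiff w hw]
      simp
  | case2 indeg topo u rest ih =>
      intro hinv
      rw [kahnA]
      exact ih (kinv_step n adj he indeg u rest topo hinv)

-- ---- initial state of Kahn's algorithm ----

def istep (ind : List Int) (p : Int × Int) : List Int :=
  PySem.List.pySetD ind p.2 (gi ind p.2 + 1)

theorem ifold_len (es : List (Int × Int)) : ∀ (ind : List Int), (∀ p ∈ es, 0 ≤ p.2) →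
    (es.foldl istep ind).length = ind.length := by
  induction es with
  | nil => intro ind _; rfl
  | cons p es ih =>
      intro ind hes
      rw [List.foldl_cons, ih _ (fun q hq => hes q (by simp [hq])), istep,
        length_setD _ _ _ (hes p (by simp))]

theorem ifold_gi (es : List (Int × Int)) : ∀ (ind : List Int),
    (∀ p ∈ es, 0 ≤ p.2 ∧ p.2 < (ind.length : Int)) → ∀ w : Int, 0 ≤ w →
    gi (es.foldl istep ind) w = gi ind w + (((es.map Prod.snd).count w : Nat) : Int) := by
  induction es with
  | nil => intro ind _ w _; simp
  | cons p es ih =>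
      intro ind hes w hw
      have hp2 := hes p (by simp)
      rw [List.foldl_cons, ih _ (by
        intro q hq
        rw [istep, length_setD _ _ _ hp2.1]
        exact hes q (by simp [hq])) w hw]
      rw [istep, gi_set _ _ _ _ hp2.1 hw, List.map_cons, List.count_cons]
      by_cases hwp : w = p.2
      · rw [if_pos ⟨hwp, hp2.2⟩]
        simp [hwp]
        push_cast
        omega
      · rw [if_neg (fun hc => hwp hc.1)]
        simp [show (p.2 == w) = false by simp [Ne.symm hwp]]

theorem mapsnd_flatE (adj : PySem.Dict Int (List Int)) (l : List Int) :
    (flatE adj l).map Prod.snd = l.flatMap (pwEdges adj) := by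
  induction l with
  | nil => rfl
  | cons x l ih =>
      rw [flatE, List.flatMap_cons, List.map_append, ← flatE, ih, List.flatMap_cons,
        List.map_map]
      simp [Function.comp_def]

theorem count_flatMap_int (l : List Int) (g : Int → List Int) (w : Int) :
    (((l.flatMap g).count w : Nat) : Int) = (l.map (fun x => ((g x).count w : Int))).sum := by
  induction l with
  | nil => simp
  | cons x l ih =>
      rw [List.flatMap_cons, List.count_append, List.map_cons, List.sum_cons, ← ih]
      push_cast
      ring

theorem rem_empty (n : Int) (adj : PySem.Dict Int (List Int)) (w : Int) :
    rem n adj w [] = ((((flatE adj (nds n)).map Prod.snd).count w : Nat) : Int) := by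
  rw [rem, mapsnd_flatE, count_flatMap_int]
  simp [cnt]

theorem gi_replicate_zero (L : Nat) (w : Int) (hw : 0 ≤ w) :
    gi (List.replicate L (0 : Int)) w = 0 := by
  rw [gi_eq _ _ hw]
  by_cases h : w.toNat < L
  · rw [List.getD_eq_getElem _ _ (by simpa using h)]
    simp
  · rw [List.getD_eq_default _ _ (by simpa using h)]

theorem kinv_init (n : Int) (adj : PySem.Dict Int (List Int)) (he : HEDGE n adj) :
    KINV n adj
      ((nds n).foldl
        (fun ind u => (pwEdges adj u).foldl
          (fun ind v => PySem.List.pySetD ind v (PySem.List.pyGetD ind v 0 + 1)) ind)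
        (List.replicate (n + 1).toNat (0 : Int)))
      ((nds n).filter
        (fun u => PySem.List.pyGetD
          ((nds n).foldl
            (fun ind u => (pwEdges adj u).foldl
              (fun ind v => PySem.List.pySetD ind v (PySem.List.pyGetD ind v 0 + 1)) ind)
            (List.replicate (n + 1).toNat (0 : Int))) u 0 == 0))
      [] := by
  have hflat : (nds n).foldl
      (fun ind u => (pwEdges adj u).foldl
        (fun ind v => PySem.List.pySetD ind v (PySem.List.pyGetD ind v 0 + 1)) ind)
      (List.replicate (n + 1).toNat (0 : Int)) =
      (flatE adj (nds n)).foldl istep (List.replicate (n + 1).toNat (0 : Int)) := by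
    rw [flatE]
    exact foldl_nested_flatMap (nds n) (pwEdges adj) istep _
  set ind0 := (nds n).foldl
      (fun ind u => (pwEdges adj u).foldl
        (fun ind v => PySem.List.pySetD ind v (PySem.List.pyGetD ind v 0 + 1)) ind)
      (List.replicate (n + 1).toNat (0 : Int)) with hind0
  have htgt : ∀ p ∈ flatE adj (nds n), 0 ≤ p.2 ∧
      p.2 < ((List.replicate (n + 1).toNat (0 : Int)).length : Int) := by
    intro p hp
    rw [mem_flatE] at hp
    have h1 := (mem_nds n p.1).mp hp.1
    have h2 := (mem_nds n p.2).mp (he p.1 hp.1 p.2 hp.2)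
    simp only [List.length_replicate]
    omega
  have hlen : ind0.length = (n + 1).toNat := by
    rw [hflat, ifold_len _ _ (fun p hp => (htgt p hp).1)]
    simp
  have hgi0 : ∀ w ∈ nds n, gi ind0 w = rem n adj w [] := by
    intro w hw
    have hw0 : 0 ≤ w := by have := (mem_nds n w).mp hw; omega
    rw [hflat, ifold_gi _ _ htgt w hw0, gi_replicate_zero _ _ hw0, rem_empty]
    ring
  refine ⟨hlen, hgi0, by simp, by simp, List.Nodup.filter _ (nds_nodup n), ?_, by simp, ?_, ?_⟩
  · intro x hx
    exact List.mem_of_mem_filter hx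
  · intro w hw
    constructor
    · rintro (h | h)
      · simp at h
      · have := List.of_mem_filter h
        rw [← hgi0 w hw]
        simpa using this
    · intro h
      right
      apply List.mem_filter.mpr
      refine ⟨hw, ?_⟩
      rw [← hgi0 w hw] at h
      simpa using h
  · intro X w Y hXY
    exact absurd hXY (by simp)

-- ---- closedness of A's propagation passes ----

def FWD (adj : PySem.Dict Int (List Int)) (T : List Int) : Prop :=
  ∀ X w Y, T = X ++ w :: Y → ∀ v ∈ pwEdges adj w, v ∈ Y

theorem fwd_tail (adj : PySem.Dict Int (List Int)) (w : Int) (T : List Int)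
    (h : FWD adj (w :: T)) : FWD adj T := by
  intro X x Y hT v hv
  exact h (w :: X) x Y (by rw [hT]; rfl) v hv

theorem fwd_mem_tgt (adj : PySem.Dict Int (List Int)) (T : List Int) (hfwd : FWD adj T)
    (p : Int × Int) (hp : p ∈ flatE adj T) : p.2 ∈ T := by
  rw [mem_flatE] at hp
  obtain ⟨X, Y, hXY⟩ := List.append_of_mem hp.1
  have := hfwd X p.1 Y hXY p.2 hp.2
  rw [hXY]
  simp [this]

theorem goodp_flatE (n : Int) (adj : PySem.Dict Int (List Int)) (he : HEDGE n adj)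
    (T : List Int) (hsub : ∀ x ∈ T, x ∈ nds n) :
    ∀ p ∈ flatE adj T, GoodP p ∧ 1 ≤ p.2 ∧ p.2 < n + 1 := by
  intro p hp
  rw [mem_flatE] at hp
  have h1 := (mem_nds n p.1).mp (hsub p.1 hp.1)
  have h2 := (mem_nds n p.2).mp (he p.1 (hsub p.1 hp.1) p.2 hp.2)
  exact ⟨⟨by omega, by omega⟩, by omega, by omega⟩

theorem passE_closed (n : Int) (adj : PySem.Dict Int (List Int)) (he : HEDGE n adj) :
    ∀ (T : List Int), T.Nodup → (∀ x ∈ T, x ∈ nds n) → FWD adj T →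
    ∀ (e : List Int), (e.length : Int) = n + 1 →
    ∀ u ∈ T, ∀ v ∈ pwEdges adj u,
      gi (rfold (flatE adj T) e) u + 1 ≤ gi (rfold (flatE adj T) e) v := by
  intro T
  induction T with
  | nil => intro _ _ _ e _ u hu; simp at hu
  | cons w T ih =>
      intro hnd hsub hfwd e hlen u hu v hv
      have hgood := goodp_flatE n adj he (w :: T) hsub
      have hgoodT : ∀ p ∈ flatE adj T, GoodP p ∧ 1 ≤ p.2 ∧ p.2 < n + 1 :=
        goodp_flatE n adj he T (fun x hx => hsub x (by simp [hx]))
      have hgoodG : ∀ p ∈ (pwEdges adj w).map (fun v => (w, v)), GoodP p := by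
        intro p hp
        apply (hgood p ?_).1
        rw [mem_flatE]
        simp only [List.mem_map] at hp
        obtain ⟨x, hx, rfl⟩ := hp
        exact ⟨by simp, by simpa using hx⟩
      have hwT : w ∉ T := (List.nodup_cons.mp hnd).1
      have hFh : ∀ x ∈ pwEdges adj w, x ∈ T := by
        intro x hx
        exact hfwd [] w T rfl x hx
      have hsplit : flatE adj (w :: T) = ((pwEdges adj w).map (fun v => (w, v))) ++ flatE adj T := by
        rw [flatE, List.flatMap_cons]; rfl
      have hfold : rfold (flatE adj (w :: T)) e =
          rfold (flatE adj T) (rfold ((pwEdges adj w).map (fun v => (w, v))) e) := by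
        rw [hsplit, rfold, List.foldl_append]; rfl
      set e1 := rfold ((pwEdges adj w).map (fun v => (w, v))) e with he1
      have hlen1 : (e1.length : Int) = n + 1 := by
        rw [he1, length_rfold _ _ hgoodG]; exact hlen
      have hw0 : 0 ≤ w := by
        have := (mem_nds n w).mp (hsub w (by simp)); omega
      rcases List.mem_cons.mp hu with rfl | huT
      · -- u = w : its own group establishes the bound, later groups keep it
        have hA : gi (rfold (flatE adj T) e1) u = gi e1 u := by
          apply gi_rfold_untouched _ _ (fun p hp => (hgoodT p hp).1) u hw0
          intro p hp
          have := fwd_mem_tgt adj T (fwd_tail adj u T hfwd) p hp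
          exact fun hc => hwT (hc ▸ this)
        have hB : gi e1 u = gi e u := by
          rw [he1]
          apply gi_rfold_untouched _ _ hgoodG u hw0
          intro p hp
          simp only [List.mem_map] at hp
          obtain ⟨x, hx, rfl⟩ := hp
          have := hFh x hx
          exact fun hc => hwT (hc ▸ this)
        have hC : gi e u + 1 ≤ gi e1 v := by
          rw [he1]
          apply gi_rfold_reach _ hgoodG (u, v) ?_ e ?_ (gi e u) le_rfl
          · simp only [List.mem_map]
            exact ⟨v, hv, rfl⟩
          · have := (mem_nds n v).mp (he u (hsub u (by simp)) v hv)
            omega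
        have hD : gi e1 v ≤ gi (rfold (flatE adj T) e1) v :=
          gi_rfold_le _ _ (fun p hp => (hgoodT p hp).1) v
            (by have := (mem_nds n v).mp (he u (hsub u (by simp)) v hv); omega)
        rw [hfold, hA, hB]
        omega
      · rw [hfold]
        exact ih (List.nodup_cons.mp hnd).2 (fun x hx => hsub x (by simp [hx]))
          (fwd_tail adj w T hfwd) e1 hlen1 u huT v hv

theorem swap_flatE (adj : PySem.Dict Int (List Int)) (l : List Int) :
    (flatE adj l).map Prod.swap = l.flatMap (fun x => (pwEdges adj x).map (fun v => (v, x))) := by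
  induction l with
  | nil => rfl
  | cons x l ih =>
      rw [flatE, List.flatMap_cons, List.map_append, ← flatE, ih, List.flatMap_cons,
        List.map_map]
      rfl

theorem passL_closed_aux (n : Int) (adj : PySem.Dict Int (List Int)) (he : HEDGE n adj) :
    ∀ (U A e : List Int), (A ++ U).Nodup → (∀ x ∈ A ++ U, x ∈ nds n) →
      (∀ X x Y, U = X ++ x :: Y → ∀ v ∈ pwEdges adj x, v ∈ A ++ X) →
      (e.length : Int) = n + 1 →
      ∀ u ∈ U, ∀ v ∈ pwEdges adj u,
        gi (rfold (U.flatMap (fun x => (pwEdges adj x).map (fun v => (v, x)))) e) v + 1 ≤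
          gi (rfold (U.flatMap (fun x => (pwEdges adj x).map (fun v => (v, x)))) e) u := by
  intro U
  induction U with
  | nil => intro A e _ _ _ _ u hu; simp at hu
  | cons w U ih =>
      intro A e hnd hsub hbck hlen u hu v hv
      have hgoodG : ∀ p ∈ (pwEdges adj w).map (fun v => (v, w)), GoodP p := by
        intro p hp
        simp only [List.mem_map] at hp
        obtain ⟨x, hx, rfl⟩ := hp
        have h1 := (mem_nds n w).mp (hsub w (by simp))
        have h2 := (mem_nds n x).mp (he w (hsub w (by simp)) x hx)
        exact ⟨by omega, by omega⟩
      have hgoodU : ∀ p ∈ U.flatMap (fun x => (pwEdges adj x).map (fun v => (v, x))), GoodP p := by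
        intro p hp
        simp only [List.mem_flatMap, List.mem_map] at hp
        obtain ⟨x, hx, y, hy, rfl⟩ := hp
        have h1 := (mem_nds n x).mp (hsub x (by simp [hx]))
        have h2 := (mem_nds n y).mp (he x (hsub x (by simp [hx])) y hy)
        exact ⟨by omega, by omega⟩
      have htgtU : ∀ p ∈ U.flatMap (fun x => (pwEdges adj x).map (fun v => (v, x))), p.2 ∈ U := by
        intro p hp
        simp only [List.mem_flatMap, List.mem_map] at hp
        obtain ⟨x, hx, y, hy, rfl⟩ := hp
        exact hx
      have hwU : w ∉ U := by
        have := List.Nodup.of_append_right hnd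
        exact (List.nodup_cons.mp this).1
      have hfold : rfold ((w :: U).flatMap (fun x => (pwEdges adj x).map (fun v => (v, x)))) e =
          rfold (U.flatMap (fun x => (pwEdges adj x).map (fun v => (v, x))))
            (rfold ((pwEdges adj w).map (fun v => (v, w))) e) := by
        rw [List.flatMap_cons, rfold, List.foldl_append]; rfl
      set e1 := rfold ((pwEdges adj w).map (fun v => (v, w))) e with he1
      have hlen1 : (e1.length : Int) = n + 1 := by
        rw [he1, length_rfold _ _ hgoodG]; exact hlen
      have hw0 : 0 ≤ w := by have := (mem_nds n w).mp (hsub w (by simp)); omega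
      rcases List.mem_cons.mp hu with rfl | huU
      · -- u = w : sources of w's edges lie in A, untouched afterwards
        have hvA : v ∈ A := by
          have := hbck [] u U rfl v hv
          simpa using this
        have hv0 : 0 ≤ v := by
          have := (mem_nds n v).mp (hsub v (by simp [List.mem_append.mpr (Or.inl hvA)]))
          omega
        have hvU : v ∉ U := by
          intro hc
          exact (List.disjoint_of_nodup_append hnd) hvA (by simp [hc])
        have hvw : v ≠ u := by
          intro hc
          exact (List.disjoint_of_nodup_append hnd) (hc ▸ hvA) (by simp)
        have hA1 : gi (rfold (U.flatMap (fun x => (pwEdges adj x).map (fun v => (v, x)))) e1) v = gi e1 v := by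
          apply gi_rfold_untouched _ _ hgoodU v hv0
          intro p hp
          exact fun hc => hvU (hc ▸ htgtU p hp)
        have hA2 : gi e1 v = gi e v := by
          rw [he1]
          apply gi_rfold_untouched _ _ hgoodG v hv0
          intro p hp
          simp only [List.mem_map] at hp
          obtain ⟨x, hx, rfl⟩ := hp
          exact fun hc => hvw hc.symm
        have hB : gi e v + 1 ≤ gi e1 u := by
          rw [he1]
          apply gi_rfold_reach _ hgoodG (v, u) ?_ e ?_ (gi e v) le_rfl
          · simp only [List.mem_map]
            exact ⟨v, hv, rfl⟩
          · have := (mem_nds n u).mp (hsub u (by simp))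
            omega
        have hC : gi e1 u ≤ gi (rfold (U.flatMap (fun x => (pwEdges adj x).map (fun v => (v, x)))) e1) u :=
          gi_rfold_le _ _ hgoodU u hw0
        rw [hfold, hA1, hA2]
        omega
      · rw [hfold]
        refine ih (A ++ [w]) e1 ?_ ?_ ?_ hlen1 u huU v hv
        · rw [List.append_assoc]
          simpa using hnd
        · intro x hx
          apply hsub
          rw [List.append_assoc] at hx
          simpa using hx
        · intro X x Y hU v' hv'
          have := hbck (w :: X) x Y (by rw [hU]; rfl) v' hv'
          rw [List.append_assoc]
          simpa using this

-- ---- the main loop lemma: B's rounds converge to A's propagation result ----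

theorem gLoop_main (es : List (Int × Int)) (U base E : List Int)
    (hgood : ∀ p ∈ es, GoodP p)
    (htlt : ∀ p ∈ es, p.2 < (E.length : Int))
    (hU0 : ∀ v ∈ U, 0 ≤ v)
    (hC : ∀ p ∈ es, gi E p.1 + 1 ≤ gi E p.2)
    (hUB : ∀ v : Int, 0 ≤ v →
      gi E v ≤ gi base v ∨ ∃ p ∈ es, p.2 = v ∧ gi E v ≤ gi E p.1 + 1)
    (hPB : ∀ X v Y, U = X ++ v :: Y → ∀ p ∈ es, p.2 = v → p.1 ∈ X)
    (hT : ∀ p ∈ es, p.2 ∈ U)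
    (hMIN : ∀ e' : List Int, e'.length = E.length →
      (∀ i : Int, 0 ≤ i → gi base i ≤ gi e' i) →
      (∀ p ∈ es, gi e' p.1 + 1 ≤ gi e' p.2) →
      ∀ i : Int, 0 ≤ i → gi E i ≤ gi e' i) :
    ∀ (fuel : Nat) (e : List Int) (X Y : List Int), U = X ++ Y →
      e.length = E.length →
      (∀ i : Int, 0 ≤ i → gi base i ≤ gi e i) →
      (∀ i : Int, 0 ≤ i → gi e i ≤ gi E i) →
      (∀ i : Int, 0 ≤ i → (∀ p ∈ es, p.2 ≠ i) → gi e i = gi E i) →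
      (∀ v ∈ X, gi e v = gi E v) →
      Y.length < fuel →
      gLoop es fuel e = (E, false) := by
  intro fuel
  induction fuel with
  | zero => intro e X Y _ _ _ _ _ _ hYf; omega
  | succ f ihf =>
      intro e X Y hXY hel hbe heE hoff hXex hYf
      have hs1 : (cfold es (e, false)).1 = rfold es e := cfold_fst es (e, false) hgood
      by_cases hflag : (cfold es (e, false)).2 = false
      · obtain ⟨hid, hcl⟩ := cfold_flag_false es e hflag
        have heq : e = E := by
          apply list_ext_gi e E hel
          intro i hi
          have h1 := heE i hi
          have h2 := hMIN e hel hbe hcl i hi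
          omega
        have hcf : cfold es (e, false) = (E, false) := by
          rw [heq]; exact cfold_closed es E hC
        match f with
        | 0 => rw [gLoop]; exact hcf
        | f' + 1 =>
            rw [gLoop]
            simp only [hcf]
            simp
      · have hflag' : (cfold es (e, false)).2 = true := by
          simpa using hflag
        cases Y with
        | nil =>
            exfalso
            have hXU : X = U := by rw [hXY]; simp
            have heq : e = E := by
              apply list_ext_gi e E hel
              intro i hi
              by_cases htg : ∀ p ∈ es, p.2 ≠ i
              · exact hoff i hi htg
              · push_neg at htg
                obtain ⟨p, hp, hpi⟩ := htg
                have hiU : i ∈ U := hpi ▸ hT p hp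
                exact hXex i (hXU ▸ hiU)
            rw [heq, cfold_closed es E hC] at hflag'
            simp at hflag'
        | cons v Y' =>
            cases f with
            | zero => simp at hYf
            | succ f' =>
                rw [gLoop]
                simp only [hflag', if_true]
                rw [hs1]
                have hvU : v ∈ U := by rw [hXY]; simp
                have hv0 : 0 ≤ v := hU0 v hvU
                have hel' : (rfold es e).length = E.length := by
                  rw [length_rfold es e hgood]; exact hel
                have hbe' : ∀ i : Int, 0 ≤ i → gi base i ≤ gi (rfold es e) i :=
                  fun i hi => le_trans (hbe i hi) (gi_rfold_le es e hgood i hi)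
                have heE' : ∀ i : Int, 0 ≤ i → gi (rfold es e) i ≤ gi E i :=
                  gi_rfold_bound es E hC e hgood (by rw [hel]) heE
                have hoff' : ∀ i : Int, 0 ≤ i → (∀ p ∈ es, p.2 ≠ i) → gi (rfold es e) i = gi E i := by
                  intro i hi htg
                  rw [gi_rfold_untouched es e hgood i hi htg]
                  exact hoff i hi htg
                have hXex' : ∀ x ∈ X ++ [v], gi (rfold es e) x = gi E x := by
                  intro x hx
                  rcases List.mem_append.mp hx with hxX | hxv
                  · have h1 := hXex x hxX
                    have hx0 : 0 ≤ x := hU0 x (by rw [hXY]; exact List.mem_append.mpr (Or.inl hxX))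
                    have h2 := gi_rfold_le es e hgood x hx0
                    have h3 := heE' x hx0
                    omega
                  · rw [List.mem_singleton] at hxv
                    subst hxv
                    have hle := heE' x hv0
                    rcases hUB x hv0 with hub | ⟨p, hp, hp2, hple⟩
                    · have := hbe' x hv0
                      omega
                    · have hp1X : p.1 ∈ X := hPB X x Y' hXY p hp hp2
                      have hp10 : 0 ≤ p.1 := (hgood p hp).1
                      have hpeq : gi e p.1 = gi E p.1 := hXex p.1 hp1X
                      have hreach : gi E p.1 + 1 ≤ gi (rfold es e) p.2 :=
                        gi_rfold_reach es hgood p hp e (by rw [hel]; exact htlt p hp)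
                          (gi E p.1) (by omega)
                      rw [hp2] at hreach
                      omega
                exact ihf (rfold es e) (X ++ [v]) Y' (by rw [hXY]; simp) hel' hbe' heE'
                  hoff' hXex' (by simp at hYf ⊢; omega)

-- ---- bridging facts for the final assembly ----

theorem hedge_of_pre (n : Int) (out_adj : List (Int × List Int))
    (h2 : ∀ p ∈ (PySem.Dict.ofList out_adj).items, 1 ≤ p.1 → p.1 ≤ n → ∀ v ∈ p.2, 1 ≤ v ∧ v ≤ n) :
    HEDGE n (PySem.Dict.ofList out_adj) := by
  intro u hu v hv
  have hun := (mem_nds n u).mp hu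
  rw [pwEdges] at hv
  cases hg : (PySem.Dict.ofList out_adj).get? u with
  | none => rw [hg] at hv; simp at hv
  | some l =>
      rw [hg] at hv
      simp only [Option.getD_some] at hv
      have := h2 (u, l) (PySem.Dict.mem_items_of_get?_eq_some _ hg) (by omega) (by omega) v hv
      rw [mem_nds]
      omega

theorem exists_min_int : ∀ (l : List Int) (f : Int → Int), l ≠ [] → ∃ m ∈ l, ∀ x ∈ l, f m ≤ f x := by
  intro l f
  induction l with
  | nil => intro h; simp at h
  | cons y l ih =>
      intro _
      cases l with
      | nil => exact ⟨y, by simp, by intro x hx; simp at hx; subst hx; exact le_rfl⟩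
      | cons z l' =>
          obtain ⟨m, hm, hmin⟩ := ih (by simp)
          by_cases hc : f y ≤ f m
          · exact ⟨y, by simp, by
              intro x hx
              rcases List.mem_cons.mp hx with rfl | hx'
              · exact le_rfl
              · exact le_trans hc (hmin x hx')⟩
          · exact ⟨m, by simp [hm], by
              intro x hx
              rcases List.mem_cons.mp hx with rfl | hx'
              · omega
              · exact hmin x hx'⟩

theorem fwd_of_perm (n : Int) (adj : PySem.Dict Int (List Int)) (he : HEDGE n adj)
    (T : List Int) (hnd : T.Nodup) (hsub : ∀ x ∈ T, x ∈ nds n)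
    (hsplit : ∀ X w Y, T = X ++ w :: Y → rem n adj w X = 0)
    (hall : ∀ x ∈ nds n, x ∈ T) : FWD adj T := by
  intro X w Y hT v hv
  have hwnds : w ∈ nds n := hsub w (by rw [hT]; simp)
  have hvnds : v ∈ nds n := he w hwnds v hv
  have hvT : v ∈ T := hall v hvnds
  have hndX : (X ++ w :: Y).Nodup := hT ▸ hnd
  have hwX : w ∉ X := by
    intro hc
    exact (List.disjoint_of_nodup_append hndX) hc (by simp)
  rw [hT] at hvT
  rcases List.mem_append.mp hvT with hvX | hvwY
  · exfalso
    obtain ⟨X1, X2, hX12⟩ := List.append_of_mem hvX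
    have hT2 : T = X1 ++ v :: (X2 ++ w :: Y) := by rw [hT, hX12]; simp
    have h0 := hsplit X1 v _ hT2
    have hw1 : w ∉ X1 := fun hc => hwX (by rw [hX12]; simp [hc])
    have hcnt : 1 ≤ cnt adj v w := by
      have : 0 < (pwEdges adj w).count v := List.count_pos_iff.mpr hv
      rw [cnt]; omega
    have := rem_single_le n adj v w X1 hwnds hw1
    omega
  · rcases List.mem_cons.mp hvwY with hvw | hvY
    · exfalso
      subst hvw
      have h0 := hsplit X v Y hT
      have hcnt : 1 ≤ cnt adj v v := by
        have : 0 < (pwEdges adj v).count v := List.count_pos_iff.mpr hv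
        rw [cnt]; omega
      have := rem_single_le n adj v v X hwnds hwX
      omega
    · exact hvY

theorem mem_swap_flatE (adj : PySem.Dict Int (List Int)) (l : List Int) (p : Int × Int) :
    p ∈ (flatE adj l).map Prod.swap ↔ p.2 ∈ l ∧ p.1 ∈ pwEdges adj p.2 := by
  rw [List.mem_map]
  constructor
  · rintro ⟨q, hq, rfl⟩
    rw [mem_flatE] at hq
    exact ⟨hq.1, hq.2⟩
  · rintro ⟨h1, h2⟩
    exact ⟨p.swap, (mem_flatE adj l p.swap).mpr (by simpa using ⟨h1, h2⟩), by simp⟩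

theorem nds_length (n : Int) (hn : 1 ≤ n) : ((nds n).length : Int) = n := by
  rw [nds, PySem.List.length_pyRange_one]
  omega

theorem subset_of_nodup_len (T S : List Int) (hnd : T.Nodup) (hndS : S.Nodup)
    (hsub : ∀ x ∈ T, x ∈ S) (hlen : S.length ≤ T.length) : ∀ x ∈ S, x ∈ T := by
  have h1 : T.toFinset ⊆ S.toFinset := by
    intro x hx
    rw [List.mem_toFinset] at hx ⊢
    exact hsub x hx
  have h2 : S.toFinset = T.toFinset := by
    apply (Finset.eq_of_subset_of_card_le h1 ?_).symm
    rw [List.toFinset_card_of_nodup hnd, List.toFinset_card_of_nodup hndS]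
    exact hlen
  intro x hx
  rw [← List.mem_toFinset, ← h2, List.mem_toFinset]
  exact hx

theorem len_le_of_nodup_subset (T S : List Int) (hnd : T.Nodup)
    (hsub : ∀ x ∈ T, x ∈ S) : T.length ≤ S.length := by
  calc T.length = T.toFinset.card := (List.toFinset_card_of_nodup hnd).symm
    _ ≤ S.toFinset.card := Finset.card_le_card (by
        intro x hx
        rw [List.mem_toFinset] at hx ⊢
        exact hsub x hx)
    _ ≤ S.length := List.toFinset_card_le S

-- ---- degenerate n ≤ 0 helpers and base-array lengths ----

theorem loopE_nil (adj : PySem.Dict Int (List Int)) (n : Int)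
    (h : PySem.List.pyRange 1 (n + 1) 1 = []) :
    ∀ (fuel : Nat) (e : List Int), pwLoopE adj n fuel e = (e, false) := by
  have hr : ∀ e : List Int, pwRoundE adj n e = (e, false) := by
    intro e
    rw [pwRoundE, h, List.foldl_nil]
  intro fuel e
  match fuel with
  | 0 => rfl
  | 1 => rw [pwLoopE, hr]
  | (k + 2) => rw [pwLoopE]; simp [hr]

theorem loopL_nil (adj : PySem.Dict Int (List Int)) (n : Int)
    (h : PySem.List.pyRange n 0 (-1) = []) :
    ∀ (fuel : Nat) (l : List Int), pwLoopL adj n fuel l = (l, false) := by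
  have hr : ∀ l : List Int, pwRoundL adj n l = (l, false) := by
    intro l
    rw [pwRoundL, h, List.foldl_nil]
  intro fuel l
  match fuel with
  | 0 => rfl
  | 1 => rw [pwLoopL, hr]
  | (k + 2) => rw [pwLoopL]; simp [hr]

theorem el_len (ps : List (Int × Int)) : ∀ (a b : List Int),
    ((ps.foldl (fun (p : List Int × List Int) um =>
      (PySem.List.pySetD p.1 um.1 um.2, PySem.List.pySetD p.2 um.1 um.2)) (a, b)).1.length
        = a.length) ∧
    ((ps.foldl (fun (p : List Int × List Int) um =>
      (PySem.List.pySetD p.1 um.1 um.2, PySem.List.pySetD p.2 um.1 um.2)) (a, b)).2.length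
        = b.length) := by
  induction ps with
  | nil => intro a b; exact ⟨rfl, rfl⟩
  | cons q ps ih =>
      intro a b
      rw [List.foldl_cons]
      refine ⟨?_, ?_⟩
      · rw [(ih _ _).1, PySem.List.length_pySetD]
      · rw [(ih _ _).2, PySem.List.length_pySetD]
-- ===== VERDICT (by name: the statement is the Claim_ definition above) =====
theorem propagate_windows_spec : Claim_equal_propagate_windows := by
  intro n out_adj assigned _ hpre
  rw [Spec_propagate_windows, propagate_windows, propagate_windows_alt]
  dsimp only
  rw [show PySem.List.pyRange 1 (n + 1) 1 = nds n from rfl]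
  by_cases hn : 1 ≤ n
  · set adj := PySem.Dict.ofList out_adj with hadj
    have hedge : HEDGE n adj := hedge_of_pre n out_adj hpre.2.1
    set el := (PySem.Dict.ofList assigned).items.foldl
        (fun (p : List Int × List Int) um =>
          (PySem.List.pySetD p.1 um.1 um.2, PySem.List.pySetD p.2 um.1 um.2))
        (List.replicate (n + 1).toNat (1 : Int), List.replicate (n + 1).toNat n) with helx
    set ind0 := (nds n).foldl
        (fun ind u => (pwEdges adj u).foldl
          (fun ind v => PySem.List.pySetD ind v (PySem.List.pyGetD ind v 0 + 1)) ind)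
        (List.replicate (n + 1).toNat (0 : Int)) with hind0x
    set dq0 := (nds n).filter (fun u => PySem.List.pyGetD ind0 u 0 == 0) with hdq0x
    set T := kahnA adj ind0 dq0 [] with hTx
    obtain ⟨hTnd, hTsub, hTsplit, hTiff⟩ :=
      kahn_main n adj hedge ind0 dq0 [] (kinv_init n adj hedge)
    have hL1 : el.1.length = (n + 1).toNat := by
      rw [helx]; exact ((el_len _ _ _).1).trans (by simp)
    have hL2 : el.2.length = (n + 1).toNat := by
      rw [helx]; exact ((el_len _ _ _).2).trans (by simp)
    have hgoodT' := goodp_flatE n adj hedge T hTsub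
    have hgoodN := goodp_flatE n adj hedge (nds n) (fun x hx => hx)
    have hgoodTp : ∀ p ∈ flatE adj T, GoodP p := fun p hp => (hgoodT' p hp).1
    have hgoodNp : ∀ p ∈ flatE adj (nds n), GoodP p := fun p hp => (hgoodN p hp).1
    rw [pwLoopE_eq, show flatE adj (PySem.List.pyRange 1 (n + 1) 1) = flatE adj (nds n) from rfl]
    by_cases hlt : (T.length : Int) < n
    · rw [if_pos hlt]
      have hflag : (gLoop (flatE adj (nds n)) (n + 1).toNat el.1).2 = true := by
        by_contra hcf
        have hcf' : (gLoop (flatE adj (nds n)) (n + 1).toNat el.1).2 = false := by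
          simpa using hcf
        rcases gLoop_flag_false _ _ _ hcf' with h0 | ⟨e', hce⟩
        · omega
        · obtain ⟨_, hcl⟩ := cfold_flag_false _ _ hce
          have hSne : ∃ w, w ∈ (nds n).filter (fun x => decide (x ∉ T)) := by
            by_contra hc
            push_neg at hc
            have hallT : ∀ x ∈ nds n, x ∈ T := by
              intro x hx
              by_contra hxT
              exact hc x (List.mem_filter.mpr ⟨hx, by simpa using hxT⟩)
            have hle := len_le_of_nodup_subset (nds n) T (nds_nodup n) hallT
            have hnlen := nds_length n hn
            omega
          obtain ⟨w0, hw0⟩ := hSne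
          obtain ⟨m, hmS, hmin⟩ := exists_min_int ((nds n).filter (fun x => decide (x ∉ T)))
            (gi e') (by intro hc; rw [hc] at hw0; simp at hw0)
          have hmnds : m ∈ nds n := List.mem_of_mem_filter hmS
          have hmT : m ∉ T := by simpa using List.of_mem_filter hmS
          have hpos : 0 < rem n adj m T := by
            have h1 := rem_nonneg n adj m T
            have h2 : ¬ rem n adj m T = 0 := fun hc => hmT ((hTiff m hmnds).mpr hc)
            omega
          obtain ⟨x, hxnds, hxT, hxcnt⟩ := rem_pos_witness n adj m T hpos
          have hmx : m ∈ pwEdges adj x := by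
            rw [cnt] at hxcnt
            exact List.count_pos_iff.mp (by omega)
          have h1 := hcl (x, m) ((mem_flatE adj (nds n) (x, m)).mpr ⟨hxnds, hmx⟩)
          have h2 := hmin x (List.mem_filter.mpr ⟨hxnds, by simpa using hxT⟩)
          simp only at h1
          omega
      rw [if_pos hflag]
    · rw [if_neg hlt]
      have hTlenle : T.length ≤ (nds n).length := len_le_of_nodup_subset T (nds n) hTnd hTsub
      have hnlen := nds_length n hn
      have hall : ∀ x ∈ nds n, x ∈ T :=
        subset_of_nodup_len T (nds n) hTnd (nds_nodup n) hTsub (by omega)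
      have hfwd : FWD adj T := fwd_of_perm n adj hedge T hTnd hTsub hTsplit hall
      have hTL : T.length = n.toNat := by omega
      set E := rfold (flatE adj T) el.1 with hEx
      have hElen : E.length = (n + 1).toNat := by
        rw [hEx, length_rfold _ _ hgoodTp, hL1]
      have hmemNE : ∀ p, p ∈ flatE adj (nds n) ↔ p ∈ flatE adj T := by
        intro p
        rw [mem_flatE, mem_flatE]
        constructor
        · rintro ⟨h1, h2⟩; exact ⟨hall _ h1, h2⟩
        · rintro ⟨h1, h2⟩; exact ⟨hTsub _ h1, h2⟩
      have hclosedE : ∀ p ∈ flatE adj (nds n), gi E p.1 + 1 ≤ gi E p.2 := by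
        intro p hp
        rw [hmemNE, mem_flatE] at hp
        exact passE_closed n adj hedge T hTnd hTsub hfwd el.1 (by rw [hL1]; omega) p.1 hp.1 p.2 hp.2
      have hEloop : gLoop (flatE adj (nds n)) (n + 1).toNat el.1 = (E, false) := by
        apply gLoop_main (flatE adj (nds n)) T el.1 E hgoodNp
          (by intro p hp; have := (hgoodN p hp).2.2; rw [hElen]; omega)
          (by intro v hv; have := (mem_nds n v).mp (hTsub v hv); omega)
          hclosedE
          (by intro v hv
              rcases gi_rfold_ub (flatE adj T) hgoodTp el.1 v hv with h | ⟨p, hp, h2, h3⟩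
              · left; exact h
              · right; exact ⟨p, (hmemNE p).mpr hp, h2, h3⟩)
          (by intro X v Y hsplit' p hp hp2
              by_contra hpX
              have h0 := hTsplit X v Y hsplit'
              have hp1nds : p.1 ∈ nds n := by rw [mem_flatE] at hp; exact hp.1
              have hcnt1 : 1 ≤ cnt adj v p.1 := by
                rw [mem_flatE] at hp
                have : 0 < (pwEdges adj p.1).count v := List.count_pos_iff.mpr (hp2 ▸ hp.2)
                rw [cnt]; omega
              have := rem_single_le n adj v p.1 X hp1nds hpX
              omega)
          (by intro p hp; rw [mem_flatE] at hp; exact hall p.2 (hedge p.1 hp.1 p.2 hp.2))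
          (by intro e' hlen' hbase hcl i hi
              exact gi_rfold_bound (flatE adj T) e'
                (fun p hp => hcl p ((hmemNE p).mpr hp)) el.1 hgoodTp
                (by rw [hL1, ← hElen, hlen']) hbase i hi)
          ((n + 1).toNat) el.1 [] T rfl (by rw [hL1, hElen])
          (fun i hi => le_rfl)
          (fun i hi => gi_rfold_le (flatE adj T) el.1 hgoodTp i hi)
          (by intro i hi htg
              exact (gi_rfold_untouched (flatE adj T) el.1 hgoodTp i hi
                (fun p hp => htg p ((hmemNE p).mpr hp))).symm)
          (by simp)
          (by rw [hTL]; omega)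
      rw [hEloop]
      rw [if_neg (by simp : ¬ ((E, false) : List Int × Bool).2 = true)]
      -- latest pass
      set esL := (flatE adj (PySem.List.pyRange n 0 (-1))).map Prod.swap with hesLx
      set esT := (flatE adj T.reverse).map Prod.swap with hesTx
      set E' := rfold esT (nm el.2) with hE'x
      have hmemL : ∀ p, p ∈ esL ↔ p.2 ∈ nds n ∧ p.1 ∈ pwEdges adj p.2 := by
        intro p
        rw [hesLx, mem_swap_flatE]
        constructor
        · rintro ⟨h1, h2⟩
          have := PySem.List.mem_pyRange_neg_one.mp h1
          exact ⟨(mem_nds n p.2).mpr (by omega), h2⟩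
        · rintro ⟨h1, h2⟩
          have := (mem_nds n p.2).mp h1
          exact ⟨PySem.List.mem_pyRange_neg_one.mpr (by omega), h2⟩
      have hmemT : ∀ p, p ∈ esT ↔ p.2 ∈ nds n ∧ p.1 ∈ pwEdges adj p.2 := by
        intro p
        rw [hesTx, mem_swap_flatE, List.mem_reverse]
        constructor
        · rintro ⟨h1, h2⟩; exact ⟨hTsub _ h1, h2⟩
        · rintro ⟨h1, h2⟩; exact ⟨hall _ h1, h2⟩
      have hgoodL : ∀ p ∈ esL, GoodP p := by
        intro p hp
        rw [hmemL] at hp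
        have h1 := (mem_nds n p.2).mp hp.1
        have h2 := (mem_nds n p.1).mp (hedge p.2 hp.1 p.1 hp.2)
        exact ⟨by omega, by omega⟩
      have hgoodTT : ∀ p ∈ esT, GoodP p := by
        intro p hp
        rw [hmemT] at hp
        have h1 := (mem_nds n p.2).mp hp.1
        have h2 := (mem_nds n p.1).mp (hedge p.2 hp.1 p.1 hp.2)
        exact ⟨by omega, by omega⟩
      have hnmlen : (nm el.2).length = (n + 1).toNat := by rw [length_nm, hL2]
      have hE'len : E'.length = (n + 1).toNat := by
        rw [hE'x, length_rfold _ _ hgoodTT, hnmlen]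
      have hbck : ∀ X x Y, T.reverse = X ++ x :: Y → ∀ v ∈ pwEdges adj x, v ∈ X := by
        intro X x Y hU v hv
        have hrev : T = Y.reverse ++ x :: X.reverse := by
          have h3 := congrArg List.reverse hU
          simp only [List.reverse_reverse, List.reverse_append, List.reverse_cons] at h3
          rw [h3]
          simp
        have := hfwd Y.reverse x X.reverse hrev v hv
        simpa using this
      have hclosedL : ∀ p ∈ esL, gi E' p.1 + 1 ≤ gi E' p.2 := by
        intro p hp
        rw [hmemL] at hp
        have hpT : p.2 ∈ T.reverse := by rw [List.mem_reverse]; exact hall _ hp.1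
        have := passL_closed_aux n adj hedge T.reverse [] (nm el.2)
          (by simpa using hTnd)
          (by intro x hx; simp at hx; exact hTsub x hx)
          (by intro X x Y hU v hv; simpa using hbck X x Y hU v hv)
          (by rw [hnmlen]; omega)
          p.2 hpT p.1 hp.2
        rw [hE'x, hesTx, swap_flatE]
        exact this
      have hLloop : gLoop esL (n + 1).toNat (nm el.2) = (E', false) := by
        apply gLoop_main esL T.reverse (nm el.2) E' hgoodL
          (by intro p hp
              rw [hmemL] at hp
              have := (mem_nds n p.2).mp hp.1
              rw [hE'len]; omega)
          (by intro v hv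
              rw [List.mem_reverse] at hv
              have := (mem_nds n v).mp (hTsub v hv); omega)
          hclosedL
          (by intro v hv
              rcases gi_rfold_ub esT hgoodTT (nm el.2) v hv with h | ⟨p, hp, h2, h3⟩
              · left; exact h
              · right; exact ⟨p, (hmemL p).mpr ((hmemT p).mp hp), h2, h3⟩)
          (by intro X x Y hU p hp hp2
              rw [hmemL] at hp
              exact hbck X x Y hU p.1 (hp2 ▸ hp.2))
          (by intro p hp
              rw [hmemL] at hp
              rw [List.mem_reverse]
              exact hall p.2 hp.1)
          (by intro e' hlen' hbase hcl i hi
              exact gi_rfold_bound esT e'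
                (fun p hp => hcl p ((hmemL p).mpr ((hmemT p).mp hp))) (nm el.2) hgoodTT
                (by rw [hnmlen, ← hE'len, hlen']) hbase i hi)
          ((n + 1).toNat) (nm el.2) [] T.reverse rfl (by rw [hnmlen, hE'len])
          (fun i hi => le_rfl)
          (fun i hi => gi_rfold_le esT (nm el.2) hgoodTT i hi)
          (by intro i hi htg
              exact (gi_rfold_untouched esT (nm el.2) hgoodTT i hi
                (fun p hp => htg p ((hmemL p).mpr ((hmemT p).mp hp)))).symm)
          (by simp)
          (by rw [List.length_reverse, hTL]; omega)
      rw [pwLoopL_eq, show (flatE adj (PySem.List.pyRange n 0 (-1))).map Prod.swap = esL from rfl,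
        hLloop]
      have he2 : T.foldl
          (fun e u => (pwEdges adj u).foldl
            (fun e v => PySem.List.pySetD e v
              (max (PySem.List.pyGetD e v 0) (PySem.List.pyGetD e u 0 + 1))) e) el.1 = E :=
        foldl_nested_flatMap T (pwEdges adj) rstep el.1
      have hl2 : T.reverse.foldl
          (fun l u => (pwEdges adj u).foldl
            (fun l v => PySem.List.pySetD l u
              (min (PySem.List.pyGetD l u 0) (PySem.List.pyGetD l v 0 - 1))) l) el.2 = nm E' := by
        have hsrc : ∀ p ∈ flatE adj T.reverse, 0 ≤ p.1 := by
          intro p hp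
          rw [mem_flatE, List.mem_reverse] at hp
          have := (mem_nds n p.1).mp (hTsub p.1 hp.1)
          omega
        exact (foldl_nested_flatMap T.reverse (pwEdges adj)
          (fun (l : List Int) (p : Int × Int) => PySem.List.pySetD l p.1
            (min (PySem.List.pyGetD l p.1 0) (PySem.List.pyGetD l p.2 0 - 1))) el.2).trans
          (lfold_transport (flatE adj T.reverse) hsrc el.2)
      rw [he2, hl2]
  · have h1 : nds n = [] := by
      rw [nds]; exact PySem.List.pyRange_one_eq_nil (by omega)
    have h2 : PySem.List.pyRange n 0 (-1) = [] :=
      PySem.List.pyRange_neg_one_eq_nil (by omega)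
    rw [h1]
    simp only [List.foldl_nil, List.filter_nil]
    have hk : kahnA (PySem.Dict.ofList out_adj) (List.replicate (n + 1).toNat (0 : Int)) [] [] = [] := by
      rw [kahnA]
    simp only [hk]
    rw [loopE_nil _ _ (by rw [show PySem.List.pyRange 1 (n + 1) 1 = nds n from rfl, h1]),
      loopL_nil _ _ h2]
    simp only [List.length_nil, Nat.cast_zero, List.any_nil]
    rw [if_neg (by omega : ¬ ((0 : Int) < n))]
    simp
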